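-- pv_equiv track=rewrite | github.com/p4u-l/advent-of-code-2021 | day14/day14.py | solve
-- ===== SOURCE A (Python) =====
-- from collections import Counter
--
-- def pairs_from_str(string):
--     # generates all pairs in string, e.g. NNCB -> NN, NC, CB
--     return [x + y for x, y in zip(string, string[1:])]
--
-- def solve(polymer, rules, n):
--     # pairs             letters
--     # (NNCB:)           NNCB
--     # NN -> NC, CN      +C
--     # NC -> NB, BC      +B
--     # CB -> CH, HB      +H
--
--     # (NCNBCHB:)
--     # NC -> NB, BC      +B
--     # CN -> CC, CN      +C
--     # NB -> ...         +...
--     # BC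
--     # CH
--     # HB
--
--     pair_counter = Counter(pairs_from_str(polymer))
--     letter_counter = Counter(polymer)
--
--     for _ in range(n):
--         for key, count in list(pair_counter.items()):
--             pair_counter[key] -= count
--             to_insert = rules[key]
--             letter_counter[to_insert] += count
--             pair_counter[key[0] + to_insert] += count
--             pair_counter[to_insert + key[1]] += count
--
--     most_common_value = letter_counter.most_common()[0][1]
--     least_common_value = letter_counter.most_common()[-1][1]
--
--     return most_common_value - least_common_value
-- ===== SOURCE B (Python) =====
-- def solve(polymer, rules, n):
--     # Top-down view: expanding a pair for d steps inserts a fixed bag of letters.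
--     # Compute those bags bottom-up by dynamic programming over the depth, on the
--     # set of pairs the expansion can ever reach (found by a BFS over the rules),
--     # then add the original polymer's letters and take max - min directly.
--     steps = n if n > 0 else 0
--     base = [x + y for x, y in zip(polymer, polymer[1:])]
--
--     # BFS: every pair reachable in fewer than `steps` expansions, with its rule.
--     mid = {}
--     frontier = base
--     level = 0
--     while frontier and level < steps:
--         fresh = []
--         for p in frontier:
--             if p not in mid:
--                 m = rules[p]
--                 mid[p] = m
--                 fresh.append(p[0] + m)
--                 fresh.append(m + p[1])
--         frontier = fresh
--         level += 1
--
--     # DP over depth: ins[p] = letters inserted when p is expanded d more times.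
--     ins = {p: {} for p in mid}
--     for _ in range(steps):
--         nxt = {}
--         for p, m in mid.items():
--             acc = {}
--             for src in (ins.get(p[0] + m, {}), ins.get(m + p[1], {})):
--                 for letter, c in src.items():
--                     acc[letter] = acc.get(letter, 0) + c
--             acc[m] = acc.get(m, 0) + 1
--             nxt[p] = acc
--         ins = nxt
--
--     counts = {}
--     for letter in polymer:
--         counts[letter] = counts.get(letter, 0) + 1
--     for p in base:
--         for letter, c in ins.get(p, {}).items():
--             counts[letter] = counts.get(letter, 0) + c
--     return max(counts.values()) - min(counts.values())
-- ===== Notes on version B (the rewrite author's own statement) =====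
-- stated objective: alternative
-- what changed: Instead of A's single loop that updates one global pair-count table and a letter counter in place, B first finds the reachable pairs by a BFS over the rules, then computes per-pair inserted-letter bags bottom-up by dynamic programming over the expansion depth (the memoized top-down expand(pair,depth) recursion evaluated depth by depth), and finally sums the bags of the polymer's pairs onto the polymer's letter counts, taking max-min of the values directly instead of sorting with most_common().
import Mathlib
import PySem

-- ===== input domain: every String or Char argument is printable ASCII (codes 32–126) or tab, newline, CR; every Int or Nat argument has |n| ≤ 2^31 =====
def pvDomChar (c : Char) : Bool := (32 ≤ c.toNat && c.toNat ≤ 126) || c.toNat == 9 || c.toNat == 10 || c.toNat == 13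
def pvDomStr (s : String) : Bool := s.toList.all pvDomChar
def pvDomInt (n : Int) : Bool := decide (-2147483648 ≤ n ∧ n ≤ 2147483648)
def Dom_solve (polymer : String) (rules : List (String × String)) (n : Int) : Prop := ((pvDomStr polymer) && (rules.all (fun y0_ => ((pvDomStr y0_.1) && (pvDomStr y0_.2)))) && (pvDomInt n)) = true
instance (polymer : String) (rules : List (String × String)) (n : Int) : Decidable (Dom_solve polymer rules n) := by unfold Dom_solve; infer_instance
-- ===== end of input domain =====

-- B finds the reachable pairs by BFS over the rules, computes per-pair inserted-letter
-- bags bottom-up by DP over the expansion depth, and sums them onto the polymer's letter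
-- counts, taking max-min of the values directly; alternative decomposition, similar cost.


-- ===== PORT A =====

def pairs_from_str (string : String) : List String :=
  (string.toList.zip (PySem.List.slice string.toList (some 1) none)).map
    (fun xy => String.ofList [xy.1, xy.2])

def stepItemA (R : PySem.Dict String String)
    (acc : Option (PySem.Dict String Int × PySem.Dict String Int)) (kc : String × Int) :
    Option (PySem.Dict String Int × PySem.Dict String Int) :=
  acc.bind (fun pl =>
      let P1 := pl.1.insert kc.1 (pl.1.getD kc.1 0 - kc.2)
      match R.get? kc.1 with
      | none => none                                  -- KeyError
      | some toInsert =>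
        let L1 := pl.2.insert toInsert (pl.2.getD toInsert 0 + kc.2)
        match PySem.Str.pyGet? kc.1 0, PySem.Str.pyGet? kc.1 1 with
        | some c0, some c1 =>
          let k1 := String.ofList (c0 :: toInsert.toList)
          let P2 := P1.insert k1 (P1.getD k1 0 + kc.2)
          let k2 := String.ofList (toInsert.toList ++ [c1])
          some (P2.insert k2 (P2.getD k2 0 + kc.2), L1)
        | _, _ => none)                               -- IndexError

/-- one pass of A's `for key, count in list(pair_counter.items())` loop; `none` = a raise. -/
def solveInnerA (R : PySem.Dict String String)
    (st : PySem.Dict String Int × PySem.Dict String Int) :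
    Option (PySem.Dict String Int × PySem.Dict String Int) :=
  st.1.items.foldl (stepItemA R) (some st)

def solveLoopA (R : PySem.Dict String String) :
    Nat → Option (PySem.Dict String Int × PySem.Dict String Int) →
    Option (PySem.Dict String Int × PySem.Dict String Int)
  | 0, st => st
  | k + 1, st => solveLoopA R k (st.bind (solveInnerA R))

def solve (polymer : String) (rules : List (String × String)) (n : Int) : Int :=
  let R := PySem.Dict.ofList rules
  let pairCounter := PySem.Dict.counter (pairs_from_str polymer)
  let letterCounter := PySem.Dict.counter (polymer.toList.map (fun c => String.ofList [c]))
  match solveLoopA R n.toNat (some (pairCounter, letterCounter)) with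
  | none => 0
  | some pl =>
    let mc := PySem.List.sorted pl.2.items (fun kv => kv.2) true
    match PySem.List.pyGet? mc 0, PySem.List.pyGet? mc (-1) with
    | some most, some least => most.2 - least.2
    | _, _ => 0                                       -- IndexError on empty polymer

-- ===== PORT B =====

/-- one frontier element of B's BFS: record its rule and enqueue its two successor pairs. -/
def bfsStepB (R : PySem.Dict String String)
    (acc : Option (PySem.Dict String String × List String)) (p : String) :
    Option (PySem.Dict String String × List String) :=
  acc.bind (fun mf =>
      if mf.1.contains p then some mf
      else
        match R.get? p with
        | none => none                                -- KeyError
        | some m =>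
          let mid1 := mf.1.insert p m
          match PySem.Str.pyGet? p 0, PySem.Str.pyGet? p 1 with
          | some c0, some c1 =>
            some (mid1, mf.2 ++ [String.ofList (c0 :: m.toList)]
                             ++ [String.ofList (m.toList ++ [c1])])
          | _, _ => none)                             -- IndexError

/-- B's `while frontier and level < steps` BFS loop. -/
def bfsLoopB (R : PySem.Dict String String) :
    Nat → List String → PySem.Dict String String → Option (PySem.Dict String String)
  | 0, _, mid => some mid
  | fuel + 1, frontier, mid =>
    if frontier.isEmpty then some mid
    else
      (frontier.foldl (bfsStepB R) (some (mid, []))).bind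
        (fun mf => bfsLoopB R fuel mf.2 mf.1)

/-- `for letter, c in src: acc[letter] = acc.get(letter, 0) + c` -/
def dictAddInto (acc : PySem.Dict String Int) (src : List (String × Int)) :
    PySem.Dict String Int :=
  src.foldl (fun a lc => a.insert lc.1 (a.getD lc.1 0 + lc.2)) acc

/-- one DP entry: the letters inserted when `p` (with rule `m`) is expanded once more. -/
def dpEntryB (ins : PySem.Dict String (PySem.Dict String Int)) (p m : String) :
    Option (PySem.Dict String Int) :=
  match PySem.Str.pyGet? p 0, PySem.Str.pyGet? p 1 with
  | some c0, some c1 =>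
    let a1 := dictAddInto PySem.Dict.empty
      (ins.getD (String.ofList (c0 :: m.toList)) PySem.Dict.empty).items
    let a2 := dictAddInto a1
      (ins.getD (String.ofList (m.toList ++ [c1])) PySem.Dict.empty).items
    some (a2.insert m (a2.getD m 0 + 1))
  | _, _ => none

/-- one round of B's DP over the depth. -/
def dpRoundB (mid : PySem.Dict String String)
    (ins : PySem.Dict String (PySem.Dict String Int)) :
    Option (PySem.Dict String (PySem.Dict String Int)) :=
  mid.items.foldl
    (fun acc pm => acc.bind (fun nxt => (dpEntryB ins pm.1 pm.2).map (fun e => nxt.insert pm.1 e)))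
    (some PySem.Dict.empty)

def dpLoopB (mid : PySem.Dict String String) :
    Nat → PySem.Dict String (PySem.Dict String Int) →
    Option (PySem.Dict String (PySem.Dict String Int))
  | 0, ins => some ins
  | k + 1, ins => (dpRoundB mid ins).bind (dpLoopB mid k)

def solve_alt (polymer : String) (rules : List (String × String)) (n : Int) : Int :=
  let R := PySem.Dict.ofList rules
  let steps := (if 0 < n then n else 0).toNat
  let base := (polymer.toList.zip (PySem.List.slice polymer.toList (some 1) none)).map
    (fun xy => String.ofList [xy.1, xy.2])
  match bfsLoopB R steps base PySem.Dict.empty with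
  | none => 0
  | some mid =>
    let ins0 := mid.items.foldl
      (fun d pm => d.insert pm.1 (PySem.Dict.empty : PySem.Dict String Int)) PySem.Dict.empty
    match dpLoopB mid steps ins0 with
    | none => 0
    | some ins =>
      let counts0 := polymer.toList.foldl
        (fun d ch => d.insert (String.ofList [ch]) (d.getD (String.ofList [ch]) 0 + 1))
        PySem.Dict.empty
      let counts := base.foldl (fun d p => dictAddInto d (ins.getD p PySem.Dict.empty).items)
        counts0
      match PySem.List.max? counts.values (fun v => v),
            PySem.List.min? counts.values (fun v => v) with
      | some mx, some mn => mx - mn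
      | _, _ => 0                                    -- ValueError on empty polymer

-- ===== PRECONDITION & SPEC =====

-- closed-form helpers describing exactly which pairs A's table ever holds when it is
-- looked up: the pairs of the polymer and, level by level, the two successor pairs
-- p[0]+rules[p] and rules[p]+p[1] of each pair already reached.
def pvMid (R : PySem.Dict String String) (q : String) : String := R.getD q ""

def pvC1 (R : PySem.Dict String String) (q : String) : String :=
  String.ofList (q.toList.take 1 ++ (pvMid R q).toList)

def pvC2 (R : PySem.Dict String String) (q : String) : String :=
  String.ofList ((pvMid R q).toList ++ (q.toList.drop 1).take 1)

def pvKids (R : PySem.Dict String String) (q : String) : List String := [pvC1 R q, pvC2 R q]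

/-- a pair A can process without raising: its rule exists and it has at least two letters. -/
def pvGoodB (R : PySem.Dict String String) (p : String) : Bool :=
  (R.get? p).isSome && decide (2 ≤ p.toList.length)

def pvBase (polymer : String) : List String :=
  (polymer.toList.zip (polymer.toList.drop 1)).map (fun xy => String.ofList [xy.1, xy.2])

def pvStepU (R : PySem.Dict String String) (U : List String) : List String :=
  PySem.Set.update U (U.flatMap (fun p => if pvGoodB R p then pvKids R p else []))

def pvU (R : PySem.Dict String String) (polymer : String) : Nat → List String
  | 0 => PySem.Set.ofList (pvBase polymer)
  | k + 1 => pvStepU R (pvU R polymer k)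

def pvCap (polymer : String) (rules : List (String × String)) : Nat :=
  polymer.toList.length + 2 * rules.length

-- Pre_solve is EXACTLY the inputs on which A returns: a nonempty polymer (otherwise A's
-- most_common()[0] raises IndexError), and, when n ≥ 1, a rule for every pair the
-- expansion reaches within n levels, each reached pair at least two letters long
-- (otherwise rules[key] raises KeyError / key[1] raises IndexError).  The level-set
-- pvU stabilises within pvCap levels, so the bound min(n-1, pvCap) loses nothing.
def Pre_solve (polymer : String) (rules : List (String × String)) (n : Int) : Prop :=
  polymer.toList ≠ [] ∧
  (n ≤ 0 ∨
    ∀ p ∈ pvU (PySem.Dict.ofList rules) polymer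
        (min (n - 1).toNat (pvCap polymer rules)),
      pvGoodB (PySem.Dict.ofList rules) p = true)
instance (polymer : String) (rules : List (String × String)) (n : Int) : Decidable (Pre_solve polymer rules n) := by unfold Pre_solve; infer_instance

def pvWitness_solve : String × (List (String × String)) × Int :=
  ("NNCB", [("NN","C"),("NC","B"),("NB","B"),("CN","C"),("CC","N"),("CB","N"),
            ("BN","B"),("BC","B"),("BB","N")], 2)

def Spec_solve (polymer : String) (rules : List (String × String)) (n : Int) (out : Int) : Prop := out = solve_alt polymer rules n
instance (polymer : String) (rules : List (String × String)) (n : Int) (out : Int) : Decidable (Spec_solve polymer rules n out) := by unfold Spec_solve; infer_instance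

-- ===== CLAIM (what is proved, stated in full; the proofs are below) =====
def Claim_equal_solve : Prop := ∀ (polymer : String) (rules : List (String × String)) (n : Int), Dom_solve polymer rules n → Pre_solve polymer rules n → Spec_solve polymer rules n (solve polymer rules n)

-- ===== LEMMAS AND PROOFS =====

-- abbreviations and ghost quantities used only by the proofs

abbrev SDict := PySem.Dict String Int

def pvδ (s t : String) : Int := if s = t then 1 else 0

def pvWsum (d : SDict) (W : String → Int) : Int := (d.items.map (fun kc => kc.2 * W kc.1)).sum

/-- depth-bounded safety: every pair the depth-`k` expansion of `p` looks up is good. -/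
def pvSafe (R : PySem.Dict String String) : Nat → String → Prop
  | 0, _ => True
  | k + 1, p => pvGoodB R p = true ∧ pvSafe R k (pvC1 R p) ∧ pvSafe R k (pvC2 R p)

/-- depth-bounded coverage by the BFS result `M`. -/
def pvCov (R M : PySem.Dict String String) : Nat → String → Prop
  | 0, _ => True
  | k + 1, p => p ∈ M.keys ∧ pvCov R M k (pvC1 R p) ∧ pvCov R M k (pvC2 R p)

/-- ghost: how many copies of letter `s` are inserted when `p` is expanded `k` times. -/
def pvIns (R : PySem.Dict String String) : Nat → String → String → Int
  | 0, _, _ => 0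
  | k + 1, p, s => pvIns R k (pvC1 R p) s + pvIns R k (pvC2 R p) s + pvδ s (pvMid R p)

@[simp] lemma pvδ_comm (a b : String) : pvδ a b = pvδ b a := by
  unfold pvδ; split_ifs with h1 h2 <;> simp_all [eq_comm]

lemma pvδ_self (a : String) : pvδ a a = 1 := by simp [pvδ]

lemma pvδ_nonneg (a b : String) : 0 ≤ pvδ a b := by unfold pvδ; split_ifs <;> omega

lemma pv_getD_shift (d : SDict) (k : String) (a : Int) (p : String) :
    (d.insert k (d.getD k 0 + a)).getD p 0 = d.getD p 0 + a * pvδ p k := by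
  rw [PySem.Dict.getD_insert]; unfold pvδ
  split_ifs with h
  · subst h; ring
  · ring

lemma pv_getD_shift_sub (d : SDict) (k : String) (a : Int) (p : String) :
    (d.insert k (d.getD k 0 - a)).getD p 0 = d.getD p 0 - a * pvδ p k := by
  rw [PySem.Dict.getD_insert]; unfold pvδ
  split_ifs with h
  · subst h; ring
  · ring

lemma pv_contains_of_getD_pos (d : SDict) (p : String) (h : 0 < d.getD p 0) : p ∈ d.keys := by
  by_contra hc
  rw [PySem.Dict.getD_of_not_contains d 0 (by
    rcases Bool.eq_false_or_eq_true (d.contains p) with h' | h'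
    · exact absurd ((PySem.Dict.contains_iff_mem_keys d p).1 h') hc
    · exact h')] at h
  omega

lemma pv_getD_of_not_mem_keys (d : SDict) (p : String) (h : p ∉ d.keys) : d.getD p 0 = 0 := by
  refine PySem.Dict.getD_of_not_contains d 0 ?_
  rcases Bool.eq_false_or_eq_true (d.contains p) with h' | h'
  · exact absurd ((PySem.Dict.contains_iff_mem_keys d p).1 h') h
  · exact h'

lemma pv_getD_nonneg_of_pos_keys (d : SDict) (h : ∀ s ∈ d.keys, 0 < d.getD s 0) (p : String) :
    0 ≤ d.getD p 0 := by
  by_cases hp : p ∈ d.keys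
  · exact le_of_lt (h p hp)
  · rw [pv_getD_of_not_mem_keys d p hp]

lemma pv_sum_delta_not_mem (l : List String) (k : String) (W : String → Int) (h : k ∉ l) :
    (l.map (fun q => W q * pvδ q k)).sum = 0 := by
  induction l with
  | nil => simp
  | cons a t ih =>
    simp only [List.map_cons, List.sum_cons]
    have ha : a ≠ k := by intro hh; exact h (hh ▸ List.mem_cons_self)
    rw [ih (fun hm => h (List.mem_cons_of_mem _ hm))]
    simp [pvδ, ha]

lemma pv_sum_delta_mem (l : List String) (k : String) (W : String → Int)
    (hnd : l.Nodup) (h : k ∈ l) :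
    (l.map (fun q => W q * pvδ q k)).sum = W k := by
  induction l with
  | nil => simp at h
  | cons a t ih =>
    simp only [List.map_cons, List.sum_cons]
    rcases List.mem_cons.1 h with h1 | hm
    · subst h1
      rw [pv_sum_delta_not_mem t k W (List.nodup_cons.1 hnd).1]
      simp [pvδ_self]
    · have ha : a ≠ k := by rintro rfl; exact (List.nodup_cons.1 hnd).1 hm
      rw [ih (List.nodup_cons.1 hnd).2 hm]
      simp [pvδ, ha]

lemma pv_wsum_eq_keys (d : SDict) (hnd : d.keys.Nodup) (W : String → Int) :
    pvWsum d W = (d.keys.map (fun q => d.getD q 0 * W q)).sum := by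
  unfold pvWsum
  rw [PySem.Dict.items_eq_map_keys d hnd 0, List.map_map]
  rfl

lemma pv_wsum_insert_shift (d : SDict) (hnd : d.keys.Nodup) (k : String) (a : Int)
    (W : String → Int) :
    pvWsum (d.insert k (d.getD k 0 + a)) W = pvWsum d W + a * W k := by
  rcases Bool.eq_false_or_eq_true (d.contains k) with hc | hc
  · rw [pv_wsum_eq_keys _ (PySem.Dict.nodup_keys_insert d k _ hnd) W,
        PySem.Dict.keys_insert_of_contains d _ hc, pv_wsum_eq_keys d hnd W]
    have hmem : k ∈ d.keys := (PySem.Dict.contains_iff_mem_keys d k).1 hc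
    have h1 : ∀ q ∈ d.keys, (d.insert k (d.getD k 0 + a)).getD q 0 * W q
        = d.getD q 0 * W q + (W q * pvδ q k) * a := by
      intro q _
      rw [pv_getD_shift]
      unfold pvδ; split_ifs <;> ring
    rw [List.map_congr_left h1, List.sum_map_add]
    have h2 : (d.keys.map (fun q => W q * pvδ q k * a)).sum
        = (d.keys.map (fun q => W q * pvδ q k)).sum * a := by
      rw [← List.sum_map_mul_right]
    rw [h2, pv_sum_delta_mem d.keys k W hnd hmem]
    ring
  · rw [pv_wsum_eq_keys _ (PySem.Dict.nodup_keys_insert d k _ hnd) W,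
        PySem.Dict.keys_insert_of_not_contains d _ hc, List.map_append, List.sum_append]
    have hk0 : d.getD k 0 = 0 := PySem.Dict.getD_of_not_contains d 0 hc
    have hmem : k ∉ d.keys := fun hm =>
      by rw [(PySem.Dict.contains_iff_mem_keys d k).2 hm] at hc; cases hc
    have h1 : (d.keys.map (fun q => (d.insert k (d.getD k 0 + a)).getD q 0 * W q)).sum
        = (d.keys.map (fun q => d.getD q 0 * W q)).sum := by
      refine congrArg List.sum (List.map_congr_left ?_)
      intro q hq
      have : q ≠ k := fun hqk => hmem (hqk ▸ hq)
      rw [PySem.Dict.getD_insert, if_neg this]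
    rw [h1, ← pv_wsum_eq_keys d hnd W]
    simp [PySem.Dict.getD_insert, hk0]

lemma pv_wsum_insert_shift_sub (d : SDict) (hnd : d.keys.Nodup) (k : String) (a : Int)
    (W : String → Int) :
    pvWsum (d.insert k (d.getD k 0 - a)) W = pvWsum d W - a * W k := by
  have := pv_wsum_insert_shift d hnd k (-a) W
  rw [sub_eq_add_neg]
  rw [this]; ring

lemma pv_wsum_delta (d : SDict) (hnd : d.keys.Nodup) (p : String) :
    pvWsum d (fun x => pvδ p x) = d.getD p 0 := by
  rw [pv_wsum_eq_keys d hnd]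
  have h1 : (d.keys.map (fun q => d.getD q 0 * pvδ p q)).sum
      = (d.keys.map (fun q => d.getD q 0 * pvδ q p)).sum := by
    refine congrArg List.sum (List.map_congr_left ?_)
    intro q _; rw [pvδ_comm]
  rw [h1]
  by_cases hp : p ∈ d.keys
  · exact pv_sum_delta_mem d.keys p (fun q => d.getD q 0) hnd hp
  · rw [pv_getD_of_not_mem_keys d p hp]
    exact pv_sum_delta_not_mem d.keys p (fun q => d.getD q 0) hp

lemma pv_wsum_counter (xs : List String) (W : String → Int) :
    pvWsum (PySem.Dict.counter xs) W = (xs.map W).sum := by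
  induction xs using List.reverseRecOn with
  | nil => rfl
  | append_singleton t x ih =>
    rw [PySem.Dict.counter_append_singleton]
    have hnd := PySem.Dict.nodup_keys_counter (κ := String) t
    have hmod : ((PySem.Dict.counter t).modify x 0 (fun v => v + 1))
        = (PySem.Dict.counter t).insert x ((PySem.Dict.counter t).getD x 0 + 1) := by
      apply PySem.Dict.ext
      rfl
    rw [hmod, pv_wsum_insert_shift _ hnd x 1 W, ih]
    simp

lemma pv_wsum_add (d : SDict) (H1 H2 : String → Int) :
    pvWsum d (fun x => H1 x + H2 x) = pvWsum d H1 + pvWsum d H2 := by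
  unfold pvWsum
  have h : ∀ kc ∈ d.items, kc.2 * (H1 kc.1 + H2 kc.1) = kc.2 * H1 kc.1 + kc.2 * H2 kc.1 := by
    intro kc _; ring
  rw [List.map_congr_left h, List.sum_map_add]

lemma pv_wsum_sub (d : SDict) (H1 H2 : String → Int) :
    pvWsum d (fun x => H1 x - H2 x) = pvWsum d H1 - pvWsum d H2 := by
  unfold pvWsum
  have h : ∀ kc ∈ d.items, kc.2 * (H1 kc.1 - H2 kc.1)
      = kc.2 * H1 kc.1 + kc.2 * (-H2 kc.1) := by
    intro kc _; ring
  rw [List.map_congr_left h, List.sum_map_add]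
  have h2 : ∀ kc ∈ d.items, kc.2 * (-H2 kc.1) = -(kc.2 * H2 kc.1) := by
    intro kc _; ring
  have h3 : (d.items.map (fun a => -(a.2 * H2 a.1))).sum
      = -((d.items.map (fun a => a.2 * H2 a.1)).sum) := by
    induction d.items with
    | nil => simp
    | cons x t ih => simp only [List.map_cons, List.sum_cons, ih]; ring
  rw [List.map_congr_left h2, h3]
  ring

lemma pv_wsum_congr_fn (d : SDict) (H1 H2 : String → Int)
    (h : ∀ p ∈ d.keys, H1 p = H2 p) : pvWsum d H1 = pvWsum d H2 := by
  unfold pvWsum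
  refine congrArg List.sum (List.map_congr_left ?_)
  intro kc hkc
  rw [h kc.1 (PySem.Dict.mem_keys_of_mem_items d hkc)]

-- counting letters as 1-char strings
lemma pv_count_delta (cs : List Char) (s : String) :
    (PySem.Dict.counter (cs.map (fun c => String.ofList [c]))).getD s 0
      = (cs.map (fun c => pvδ s (String.ofList [c]))).sum := by
  rw [PySem.Dict.getD_counter]
  induction cs with
  | nil => simp
  | cons a t ih =>
    simp only [List.map_cons, List.count_cons, List.sum_cons]
    push_cast
    rw [ih]
    by_cases h : s = String.ofList [a]
    · simp [pvδ, h]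
      try omega
    · have hb : (String.ofList [a] == s) = false := beq_eq_false_iff_ne.2 (fun hh => h hh.symm)
      simp [pvδ, h, hb]
      try omega

-- A's and B's pair lists both equal pvBase
lemma pv_pairs_eq (s : String) : pairs_from_str s = pvBase s := by
  unfold pairs_from_str pvBase
  rw [PySem.List.slice_from s.toList (by norm_num : (0:Int) ≤ 1)]
  rfl

lemma pv_two_le_decomp (q : String) (h : 2 ≤ q.toList.length) :
    ∃ c0 c1 rest, q.toList = c0 :: c1 :: rest := by
  rcases hq : q.toList with _ | ⟨c0, _ | ⟨c1, rest⟩⟩ <;> rw [hq] at h <;> simp at h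
  · exact ⟨c0, ‹_›, ‹_›, rfl⟩

lemma pv_pyGet01 (qs : String) (c0 c1 : Char) (rest : List Char)
    (h : qs.toList = c0 :: c1 :: rest) :
    PySem.Str.pyGet? qs 0 = some c0 ∧ PySem.Str.pyGet? qs 1 = some c1 := by
  constructor <;>
    simp [PySem.Str.pyGet?_eq, PySem.List.pyGet?, PySem.List.pyIdx?, h,
      show (0:Int) ≤ (rest.length:Int) + 1 by positivity]

lemma pv_children_eq (R : PySem.Dict String String) (q : String) (c0 c1 : Char)
    (rest : List Char) (h : q.toList = c0 :: c1 :: rest) :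
    String.ofList (c0 :: (pvMid R q).toList) = pvC1 R q ∧
    String.ofList ((pvMid R q).toList ++ [c1]) = pvC2 R q := by
  unfold pvC1 pvC2
  rw [h]
  exact ⟨rfl, rfl⟩

lemma pv_good_facts (R : PySem.Dict String String) (q : String) (h : pvGoodB R q = true) :
    R.get? q = some (pvMid R q) ∧ ∃ c0 c1 rest, q.toList = c0 :: c1 :: rest := by
  unfold pvGoodB at h
  rw [Bool.and_eq_true] at h
  obtain ⟨h1, h2⟩ := h
  obtain ⟨v, hv⟩ := Option.isSome_iff_exists.1 h1
  refine ⟨?_, pv_two_le_decomp q (of_decide_eq_true h2)⟩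
  rw [show pvMid R q = v by unfold pvMid; rw [PySem.Dict.getD_eq_get?_getD, hv]; rfl]
  exact hv


-- ---------- theory of the level sets pvU ----------

lemma pvU_nodup (R : PySem.Dict String String) (poly : String) :
    ∀ k, (pvU R poly k).Nodup
  | 0 => PySem.Set.nodup_ofList _
  | k + 1 => PySem.Set.nodup_update _ _ (pvU_nodup R poly k)

lemma pvU_mem_succ (R : PySem.Dict String String) (poly : String) (k : Nat) (p : String) :
    p ∈ pvU R poly (k + 1) ↔
      p ∈ pvU R poly k ∨
        ∃ q ∈ pvU R poly k, pvGoodB R q = true ∧ p ∈ pvKids R q := by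
  show p ∈ pvStepU R (pvU R poly k) ↔ _
  unfold pvStepU
  rw [PySem.Set.mem_update]
  simp only [List.mem_flatMap]
  constructor
  · rintro (h | ⟨q, hq, hp⟩)
    · exact Or.inl h
    · by_cases hg : pvGoodB R q = true
      · rw [if_pos hg] at hp
        exact Or.inr ⟨q, hq, hg, hp⟩
      · rw [if_neg hg] at hp
        simp at hp
  · rintro (h | ⟨q, hq, hg, hp⟩)
    · exact Or.inl h
    · exact Or.inr ⟨q, hq, by rw [if_pos hg]; exact hp⟩

lemma pvU_mono_succ (R : PySem.Dict String String) (poly : String) (k : Nat) :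
    ∀ p ∈ pvU R poly k, p ∈ pvU R poly (k + 1) := by
  intro p hp
  exact (pvU_mem_succ R poly k p).2 (Or.inl hp)

lemma pvU_mono (R : PySem.Dict String String) (poly : String) {m m' : Nat} (h : m ≤ m') :
    ∀ p ∈ pvU R poly m, p ∈ pvU R poly m' := by
  induction m' with
  | zero => intro p hp; rw [Nat.le_zero.1 h] at hp; exact hp
  | succ m' ih =>
    rcases Nat.lt_or_ge m (m' + 1) with h1 | h1
    · intro p hp
      exact pvU_mono_succ R poly m' p (ih (by omega) p hp)
    · intro p hp
      rw [show m = m' + 1 by omega] at hp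
      exact hp

lemma pvU_kid_mem (R : PySem.Dict String String) (poly : String) (k : Nat) (q : String)
    (hq : q ∈ pvU R poly k) (hg : pvGoodB R q = true) :
    pvC1 R q ∈ pvU R poly (k + 1) ∧ pvC2 R q ∈ pvU R poly (k + 1) := by
  constructor <;>
    exact (pvU_mem_succ R poly k _).2 (Or.inr ⟨q, hq, hg, by simp [pvKids]⟩)

lemma pvU_stable_forever (R : PySem.Dict String String) (poly : String) (k : Nat)
    (h : pvU R poly (k + 1) = pvU R poly k) :
    ∀ j, k ≤ j → pvU R poly j = pvU R poly k := by
  intro j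
  induction j with
  | zero => intro h0; rw [Nat.le_zero.1 h0]
  | succ j ih =>
    intro hj
    rcases Nat.lt_or_ge k (j + 1) with h1 | h1
    · have hjk : k ≤ j := by omega
      show pvStepU R (pvU R poly j) = _
      rw [ih hjk]
      exact h
    · rw [show k = j + 1 by omega]

lemma pvU_grow (R : PySem.Dict String String) (poly : String) (k : Nat) :
    pvU R poly (k + 1) = pvU R poly k ∨
      (pvU R poly k).length < (pvU R poly (k + 1)).length := by
  have hrw : pvU R poly (k + 1)
      = pvU R poly k ++ List.filter (fun y => !(pvU R poly k).contains y)
          (PySem.Set.ofList ((pvU R poly k).flatMap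
            (fun p => if pvGoodB R p then pvKids R p else []))) := by
    show pvStepU R (pvU R poly k) = _
    unfold pvStepU
    exact PySem.Set.update_eq_append_filter _ _
  rcases hf : List.filter (fun y => !(pvU R poly k).contains y)
      (PySem.Set.ofList ((pvU R poly k).flatMap
        (fun p => if pvGoodB R p then pvKids R p else []))) with _ | ⟨x, t⟩
  · left; rw [hrw, hf, List.append_nil]
  · right; rw [hrw, hf]
    simp [List.length_append]

lemma pvU_univ (R : PySem.Dict String String) (poly : String) :
    ∀ k, ∀ p ∈ pvU R poly k, p ∈ pvBase poly ++ R.keys.flatMap (pvKids R) := by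
  intro k
  induction k with
  | zero =>
    intro p hp
    exact List.mem_append_left _ ((PySem.Set.mem_ofList _ p).1 hp)
  | succ k ih =>
    intro p hp
    rcases (pvU_mem_succ R poly k p).1 hp with h | ⟨q, hq, hg, hp2⟩
    · exact ih p h
    · refine List.mem_append_right _ (List.mem_flatMap.2 ⟨q, ?_, hp2⟩)
      have hc : R.contains q = true := by
        rw [PySem.Dict.contains_eq_isSome_get?]
        unfold pvGoodB at hg
        rw [Bool.and_eq_true] at hg
        exact hg.1
      exact (PySem.Dict.contains_iff_mem_keys R q).1 hc

lemma pv_len_le_of_nodup_subset (U L : List String) (h1 : U.Nodup) (h2 : ∀ x ∈ U, x ∈ L) :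
    U.length ≤ L.length := by
  calc U.length = U.toFinset.card := (List.toFinset_card_of_nodup h1).symm
    _ ≤ L.toFinset.card := Finset.card_le_card (by
        intro x hx
        rw [List.mem_toFinset] at hx ⊢
        exact h2 x hx)
    _ ≤ L.length := List.toFinset_card_le L

lemma pv_sum_const2 (l : List String) : (l.map (fun _ => (2:Nat))).sum = 2 * l.length := by
  induction l with
  | nil => simp
  | cons a t ih => simp only [List.map_cons, List.sum_cons, List.length_cons, ih]; omega

lemma pv_univ_len (poly : String) (rules : List (String × String)) :
    (pvBase poly ++ (PySem.Dict.ofList rules).keys.flatMap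
        (pvKids (PySem.Dict.ofList rules))).length ≤ pvCap poly rules := by
  rw [List.length_append]
  have h1 : (pvBase poly).length ≤ poly.toList.length := by
    unfold pvBase
    rw [List.length_map, List.length_zip]
    omega
  have h2 : ((PySem.Dict.ofList rules).keys.flatMap
      (pvKids (PySem.Dict.ofList rules))).length
      = 2 * (PySem.Dict.ofList rules).keys.length := by
    rw [List.length_flatMap]
    have hc : List.map (fun q => (pvKids (PySem.Dict.ofList rules) q).length)
        (PySem.Dict.ofList rules).keys
        = List.map (fun _ => (2:Nat)) (PySem.Dict.ofList rules).keys :=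
      List.map_congr_left (fun q _ => rfl)
    rw [hc, pv_sum_const2]
  have h3 : ((PySem.Dict.ofList rules).keys).length ≤ rules.length := by
    have hk : (PySem.Dict.ofList rules).keys
        = PySem.Set.update (PySem.Dict.empty : PySem.Dict String String).keys
            (rules.map Prod.fst) :=
      PySem.Dict.keys_foldl_insert_key rules (fun p => p.1) (fun _ p => p.2) PySem.Dict.empty
    rw [PySem.Dict.keys_empty] at hk
    rw [hk, PySem.Set.update_nil_left]
    calc (PySem.Set.ofList (rules.map Prod.fst)).length
        ≤ (rules.map Prod.fst).length := PySem.Set.length_ofList_le _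
      _ = rules.length := by rw [List.length_map]
  unfold pvCap
  omega

lemma pv_exists_stable (R : PySem.Dict String String) (poly : String)
    (rules : List (String × String))
    (hu : (pvBase poly ++ R.keys.flatMap (pvKids R)).length ≤ pvCap poly rules) :
    ∃ k, k ≤ pvCap poly rules ∧ pvU R poly (k + 1) = pvU R poly k := by
  by_contra h
  push_neg at h
  have grow : ∀ k, k ≤ pvCap poly rules → (pvU R poly k).length < (pvU R poly (k + 1)).length := by
    intro k hk
    rcases pvU_grow R poly k with h1 | h1
    · exact absurd h1 (h k hk)
    · exact h1
  have hlen : ∀ k, k ≤ pvCap poly rules + 1 → k ≤ (pvU R poly k).length := by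
    intro k
    induction k with
    | zero => intro _; omega
    | succ k ih =>
      intro hk
      have := ih (by omega)
      have := grow k (by omega)
      omega
  have hbound : (pvU R poly (pvCap poly rules + 1)).length ≤ pvCap poly rules := by
    have hs := pv_len_le_of_nodup_subset (pvU R poly (pvCap poly rules + 1))
      (pvBase poly ++ R.keys.flatMap (pvKids R)) (pvU_nodup R poly _)
      (pvU_univ R poly _)
    exact le_trans hs hu
  have := hlen (pvCap poly rules + 1) (le_refl _)
  omega

/-- from the precondition: every pair reachable in fewer than n levels is good. -/
lemma pv_HG (R : PySem.Dict String String) (poly : String) (rules : List (String × String))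
    (n : Int) (hR : R = PySem.Dict.ofList rules) (hn : 1 ≤ n)
    (hpre : ∀ p ∈ pvU R poly (min (n - 1).toNat (pvCap poly rules)), pvGoodB R p = true) :
    ∀ m, m < n.toNat → ∀ p ∈ pvU R poly m, pvGoodB R p = true := by
  intro m hm p hp
  apply hpre
  have hm' : m ≤ (n - 1).toNat := by omega
  rcases le_or_gt (n - 1).toNat (pvCap poly rules) with hc | hc
  · rw [min_eq_left hc]
    exact pvU_mono R poly hm' p hp
  · rw [min_eq_right (le_of_lt hc)]
    obtain ⟨k, hk, hstable⟩ := pv_exists_stable R poly rules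
      (by rw [hR]; exact pv_univ_len poly rules)
    rcases le_or_gt m (pvCap poly rules) with h1 | h1
    · exact pvU_mono R poly h1 p hp
    · have : pvU R poly m = pvU R poly k := pvU_stable_forever R poly k hstable m (by omega)
      rw [this] at hp
      exact pvU_mono R poly hk p hp

-- ---------- safety / coverage bridges ----------

lemma pvSafe_mono (R : PySem.Dict String String) :
    ∀ k p, pvSafe R (k + 1) p → pvSafe R k p := by
  intro k
  induction k with
  | zero => intro p _; trivial
  | succ k ih =>
    rintro p ⟨hg, h1, h2⟩
    exact ⟨hg, ih _ h1, ih _ h2⟩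

lemma pv_safeBridge (R : PySem.Dict String String) (poly : String) (K : Nat)
    (HG : ∀ m, m < K → ∀ p ∈ pvU R poly m, pvGoodB R p = true) :
    ∀ c m, m + c ≤ K → ∀ p ∈ pvU R poly m, pvSafe R c p := by
  intro c
  induction c with
  | zero => intro m _ p _; trivial
  | succ c ih =>
    intro m hm p hp
    have hg := HG m (by omega) p hp
    obtain ⟨h1, h2⟩ := pvU_kid_mem R poly m p hp hg
    exact ⟨hg, ih (m + 1) (by omega) _ h1, ih (m + 1) (by omega) _ h2⟩

lemma pv_covBridge (R M : PySem.Dict String String) (poly : String) (K : Nat)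
    (HM : ∀ m, m < K → ∀ p ∈ pvU R poly m, p ∈ M.keys)
    (HG : ∀ m, m < K → ∀ p ∈ pvU R poly m, pvGoodB R p = true) :
    ∀ c m, m + c ≤ K → ∀ p ∈ pvU R poly m, pvCov R M c p := by
  intro c
  induction c with
  | zero => intro m _ p _; trivial
  | succ c ih =>
    intro m hm p hp
    have hg := HG m (by omega) p hp
    obtain ⟨h1, h2⟩ := pvU_kid_mem R poly m p hp hg
    exact ⟨HM m (by omega) p hp, ih (m + 1) (by omega) _ h1, ih (m + 1) (by omega) _ h2⟩


-- ---------- A's loop ----------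

def pvJDone (R : PySem.Dict String String) (P L : SDict) (q : String) : Prop :=
  pvC1 R q ∈ P.keys ∧ pvC2 R q ∈ P.keys ∧ 0 < L.getD (pvMid R q) 0

/-- invariant carried by A's state before `k` more rounds. -/
structure pvInvA (R : PySem.Dict String String) (polymer : String) (k : Nat)
    (P L : SDict) : Prop where
  Pnd : P.keys.Nodup
  Lnd : L.keys.Nodup
  Psafe : ∀ p ∈ P.keys, pvSafe R k p
  Pnn : ∀ p, 0 ≤ P.getD p 0
  Ppos : ∀ p ∈ P.keys, 0 < P.getD p 0 ∨ pvJDone R P L p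
  Lpos : ∀ s ∈ L.keys, 0 < L.getD s 0
  Lhead : String.ofList [polymer.toList.headD ' '] ∈ L.keys

/-- effect of one full pass of A's inner loop over a snapshot `ℓ`. -/
lemma pv_foldA_spec (R : PySem.Dict String String) :
    ∀ (ℓ : List (String × Int)) (P L : SDict), P.keys.Nodup → L.keys.Nodup →
    (∀ kc ∈ ℓ, pvGoodB R kc.1 = true) →
    (∀ kc ∈ ℓ, kc.1 ∈ P.keys) →
    ∃ P' L', ℓ.foldl (stepItemA R) (some (P, L)) = some (P', L') ∧
      (∀ W, pvWsum P' W = pvWsum P W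
          + (ℓ.map (fun kc => kc.2 * (W (pvC1 R kc.1) + W (pvC2 R kc.1) - W kc.1))).sum) ∧
      (∀ W, pvWsum L' W = pvWsum L W + (ℓ.map (fun kc => kc.2 * W (pvMid R kc.1))).sum) ∧
      P'.keys.Nodup ∧ L'.keys.Nodup ∧
      (∀ q ∈ P.keys, q ∈ P'.keys) ∧ (∀ s ∈ L.keys, s ∈ L'.keys) ∧
      (∀ p ∈ P'.keys, p ∈ P.keys ∨ ∃ kc ∈ ℓ, p = pvC1 R kc.1 ∨ p = pvC2 R kc.1) := by
  intro ℓ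
  induction ℓ with
  | nil =>
    intro P L hP hL _ _
    exact ⟨P, L, rfl, by intro W; simp, by intro W; simp, hP, hL, fun _ h => h, fun _ h => h,
      fun p hp => Or.inl hp⟩
  | cons kc t ih =>
    intro P L hP hL hok hin
    obtain ⟨hmid, c0, c1, rest, hq⟩ := pv_good_facts R kc.1 (hok kc List.mem_cons_self)
    obtain ⟨hg0, hg1⟩ := pv_pyGet01 kc.1 c0 c1 rest hq
    obtain ⟨hk1, hk2⟩ := pv_children_eq R kc.1 c0 c1 rest hq
    set P1 := P.insert kc.1 (P.getD kc.1 0 - kc.2) with hP1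
    set P2 := P1.insert (pvC1 R kc.1) (P1.getD (pvC1 R kc.1) 0 + kc.2) with hP2
    set P3 := P2.insert (pvC2 R kc.1) (P2.getD (pvC2 R kc.1) 0 + kc.2) with hP3
    set L1 := L.insert (pvMid R kc.1) (L.getD (pvMid R kc.1) 0 + kc.2) with hL1
    have hstep : stepItemA R (some (P, L)) kc = some (P3, L1) := by
      simp only [stepItemA, Option.bind, hmid, hg0, hg1, hk1, hk2]
      rfl
    have hP1nd : P1.keys.Nodup := PySem.Dict.nodup_keys_insert _ _ _ hP
    have hP2nd : P2.keys.Nodup := PySem.Dict.nodup_keys_insert _ _ _ hP1nd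
    have hP3nd : P3.keys.Nodup := PySem.Dict.nodup_keys_insert _ _ _ hP2nd
    have hL1nd : L1.keys.Nodup := PySem.Dict.nodup_keys_insert _ _ _ hL
    have hPsub : ∀ q ∈ P.keys, q ∈ P3.keys := by
      intro q hq2
      rw [hP3, hP2, hP1]
      simp only [PySem.Dict.mem_keys_insert]
      tauto
    obtain ⟨P', L', hfold, hwP, hwL, hP'nd, hL'nd, hPk, hLk, hup⟩ :=
      ih P3 L1 hP3nd hL1nd (fun x hx => hok x (List.mem_cons_of_mem _ hx))
        (fun x hx => hPsub x.1 (hin x (List.mem_cons_of_mem _ hx)))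
    refine ⟨P', L', ?_, ?_, ?_, hP'nd, hL'nd, ?_, ?_, ?_⟩
    · rw [List.foldl_cons, hstep]; exact hfold
    · intro W
      rw [hwP W]
      have h3 : pvWsum P3 W = pvWsum P W + kc.2 * (W (pvC1 R kc.1) + W (pvC2 R kc.1) - W kc.1) := by
        rw [hP3, pv_wsum_insert_shift _ hP2nd, hP2, pv_wsum_insert_shift _ hP1nd,
            hP1, pv_wsum_insert_shift_sub _ hP]
        ring
      rw [h3]
      simp only [List.map_cons, List.sum_cons]
      ring
    · intro W
      rw [hwL W]
      have h1 : pvWsum L1 W = pvWsum L W + kc.2 * W (pvMid R kc.1) := by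
        rw [hL1, pv_wsum_insert_shift _ hL]
      rw [h1]
      simp only [List.map_cons, List.sum_cons]
      ring
    · intro q hqm
      exact hPk q (hPsub q hqm)
    · intro s hsm
      refine hLk s ?_
      rw [hL1]
      simp only [PySem.Dict.mem_keys_insert]
      tauto
    · intro p hp
      rcases hup p hp with hp3 | ⟨x, hx, hor⟩
      · rw [hP3, hP2, hP1] at hp3
        simp only [PySem.Dict.mem_keys_insert] at hp3
        rcases hp3 with h | h | h | h
        · exact Or.inr ⟨kc, List.mem_cons_self, Or.inr h⟩
        · exact Or.inr ⟨kc, List.mem_cons_self, Or.inl h⟩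
        · exact Or.inl (h ▸ hin kc List.mem_cons_self)
        · exact Or.inl h
      · exact Or.inr ⟨x, List.mem_cons_of_mem _ hx, hor⟩

/-- preservation of the positivity invariant by one full pass of A's inner loop. -/
lemma pv_foldA_inv (R : PySem.Dict String String)
    (P0 L0 : SDict) (h0nd : P0.keys.Nodup)
    (h0pos : ∀ q ∈ P0.keys, 0 < P0.getD q 0 ∨ pvJDone R P0 L0 q)
    (h0good : ∀ q ∈ P0.keys, pvGoodB R q = true) (h0nn : ∀ p, 0 ≤ P0.getD p 0) :
    ∀ (ℓ : List (String × Int)) (P L : SDict),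
    (∀ x ∈ ℓ, x ∈ P0.items) →
    (ℓ.map Prod.fst).Nodup →
    (∀ kc ∈ ℓ, kc.2 ≤ P.getD kc.1 0) →
    (∀ q ∈ P0.keys, q ∈ ℓ.map Prod.fst ∨ pvJDone R P L q) →
    (∀ q ∈ P0.keys, q ∈ P.keys) →
    (∀ p ∈ P.keys, p ∈ P0.keys ∨ 0 < P.getD p 0) →
    (∀ p, 0 ≤ P.getD p 0) →
    (∀ s ∈ L.keys, 0 < L.getD s 0) →
    (∀ s, L0.getD s 0 ≤ L.getD s 0) →
    P.keys.Nodup → L.keys.Nodup →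
    ∀ P' L', ℓ.foldl (stepItemA R) (some (P, L)) = some (P', L') →
      (∀ q ∈ P0.keys, pvJDone R P' L' q) ∧
      (∀ p ∈ P'.keys, p ∈ P0.keys ∨ 0 < P'.getD p 0) ∧
      (∀ p, 0 ≤ P'.getD p 0) ∧
      (∀ s ∈ L'.keys, 0 < L'.getD s 0) := by
  intro ℓ
  induction ℓ with
  | nil =>
    intro P L _ _ _ hdone _ hnew hPnn hLpos _ _ _ P' L' hfold
    cases hfold
    refine ⟨?_, hnew, hPnn, hLpos⟩
    intro q hq
    rcases hdone q hq with h | h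
    · simp at h
    · exact h
  | cons kc t ih =>
    intro P L hsub hnd hrest hdone hkeys0 hnew hPnn hLpos hLlb hPnd hLnd P' L' hfold
    obtain ⟨q, c⟩ := kc
    have hqmem : (q, c) ∈ P0.items := hsub _ List.mem_cons_self
    have hqkeys : q ∈ P0.keys := PySem.Dict.mem_keys_of_mem_items P0 hqmem
    have hc0 : P0.getD q 0 = c := PySem.Dict.getD_of_mem_items P0 hqmem h0nd 0
    have hcnn : 0 ≤ c := hc0 ▸ h0nn q
    obtain ⟨hmid, c0, c1, rest, hq2⟩ := pv_good_facts R q (h0good q hqkeys)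
    obtain ⟨hg0, hg1⟩ := pv_pyGet01 q c0 c1 rest hq2
    obtain ⟨hk1, hk2⟩ := pv_children_eq R q c0 c1 rest hq2
    set P1 := P.insert q (P.getD q 0 - c) with hP1
    set P2 := P1.insert (pvC1 R q) (P1.getD (pvC1 R q) 0 + c) with hP2
    set P3 := P2.insert (pvC2 R q) (P2.getD (pvC2 R q) 0 + c) with hP3
    set L1 := L.insert (pvMid R q) (L.getD (pvMid R q) 0 + c) with hL1
    have hstep : stepItemA R (some (P, L)) (q, c) = some (P3, L1) := by
      simp only [stepItemA, Option.bind, hmid, hg0, hg1, hk1, hk2]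
      rfl
    have hgP3 : ∀ p, P3.getD p 0
        = P.getD p 0 + c * (pvδ p (pvC1 R q) + pvδ p (pvC2 R q)) - c * pvδ p q := by
      intro p
      rw [hP3, pv_getD_shift, hP2, pv_getD_shift, hP1, pv_getD_shift_sub]
      ring
    have hgL1 : ∀ s, L1.getD s 0 = L.getD s 0 + c * pvδ s (pvMid R q) := by
      intro s
      rw [hL1, pv_getD_shift]
    have hm3 : ∀ p, p ∈ P3.keys ↔ (p = pvC2 R q ∨ p = pvC1 R q ∨ p ∈ P.keys) := by
      intro p
      rw [hP3, hP2, hP1]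
      simp only [PySem.Dict.mem_keys_insert]
      constructor
      · rintro (h | h | h | h)
        · exact Or.inl h
        · exact Or.inr (Or.inl h)
        · exact Or.inr (Or.inr (h ▸ hkeys0 q hqkeys))
        · exact Or.inr (Or.inr h)
      · rintro (h | h | h)
        · exact Or.inl h
        · exact Or.inr (Or.inl h)
        · exact Or.inr (Or.inr (Or.inr h))
    have hm1 : ∀ s, s ∈ L1.keys ↔ (s = pvMid R q ∨ s ∈ L.keys) := by
      intro s
      rw [hL1]
      exact PySem.Dict.mem_keys_insert L _ s _
    have hLnn : ∀ s, 0 ≤ L.getD s 0 := pv_getD_nonneg_of_pos_keys L hLpos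
    have hzero : c = 0 → pvJDone R P0 L0 q := by
      intro hc
      rcases h0pos q hqkeys with h | h
      · rw [hc0, hc] at h; omega
      · exact h
    have hJq : pvJDone R P3 L1 q := by
      refine ⟨(hm3 _).2 (Or.inr (Or.inl rfl)), (hm3 _).2 (Or.inl rfl), ?_⟩
      rw [hgL1, pvδ_self, mul_one]
      rcases lt_or_eq_of_le hcnn with hc | hc
      · have := hLnn (pvMid R q); omega
      · obtain ⟨-, -, hpos0⟩ := hzero hc.symm
        have := hLlb (pvMid R q)
        omega
    have hJmono : ∀ x, pvJDone R P L x → pvJDone R P3 L1 x := by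
      rintro x ⟨hx1, hx2, hx3⟩
      refine ⟨(hm3 _).2 (Or.inr (Or.inr hx1)), (hm3 _).2 (Or.inr (Or.inr hx2)), ?_⟩
      rw [hgL1]
      nlinarith [pvδ_nonneg (pvMid R x) (pvMid R q)]
    rw [List.foldl_cons, hstep] at hfold
    have hP1nd : P1.keys.Nodup := PySem.Dict.nodup_keys_insert _ _ _ hPnd
    have hP2nd : P2.keys.Nodup := PySem.Dict.nodup_keys_insert _ _ _ hP1nd
    have hP3nd : P3.keys.Nodup := PySem.Dict.nodup_keys_insert _ _ _ hP2nd
    have hL1nd : L1.keys.Nodup := PySem.Dict.nodup_keys_insert _ _ _ hLnd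
    have htnd : (t.map Prod.fst).Nodup := (List.nodup_cons.1 hnd).2
    refine ih P3 L1 (fun x hx => hsub x (List.mem_cons_of_mem _ hx))
      htnd ?_ ?_ ?_ ?_ ?_ ?_ ?_ hP3nd hL1nd P' L' hfold
    · intro kc' hkc'
      have hne : kc'.1 ≠ q := by
        rintro hkeq
        exact (List.nodup_cons.1 hnd).1 (hkeq ▸ List.mem_map.2 ⟨kc', hkc', rfl⟩)
      have := hrest kc' (List.mem_cons_of_mem _ hkc')
      rw [hgP3]
      have h1 := pvδ_nonneg kc'.1 (pvC1 R q)
      have h2 := pvδ_nonneg kc'.1 (pvC2 R q)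
      have h3 : pvδ kc'.1 q = 0 := by simp [pvδ, hne]
      nlinarith
    · intro x hx
      rcases hdone x hx with h | h
      · rw [List.map_cons] at h
        rcases List.mem_cons.1 h with h1 | h1
        · exact Or.inr (h1 ▸ hJq)
        · exact Or.inl h1
      · exact Or.inr (hJmono x h)
    · intro x hx
      exact (hm3 x).2 (Or.inr (Or.inr (hkeys0 x hx)))
    · intro p hp
      by_cases hp0 : p ∈ P0.keys
      · exact Or.inl hp0
      right
      have hpq : p ≠ q := fun h => hp0 (h ▸ hqkeys)
      have hδq : pvδ p q = 0 := by simp [pvδ, hpq]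
      rcases (hm3 p).1 hp with h | h | h
      · have hcpos : 0 < c := by
          rcases lt_or_eq_of_le hcnn with hc | hc
          · exact hc
          · obtain ⟨-, hk, -⟩ := hzero hc.symm
            exact absurd (h ▸ hk) hp0
        rw [hgP3, hδq, h, pvδ_self]
        have h1 := pvδ_nonneg (pvC2 R q) (pvC1 R q)
        have h2 := hPnn (pvC2 R q)
        nlinarith
      · have hcpos : 0 < c := by
          rcases lt_or_eq_of_le hcnn with hc | hc
          · exact hc
          · obtain ⟨hk, -, -⟩ := hzero hc.symm
            exact absurd (h ▸ hk) hp0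
        rw [hgP3, hδq, h, pvδ_self]
        have h1 := pvδ_nonneg (pvC1 R q) (pvC2 R q)
        have h2 := hPnn (pvC1 R q)
        nlinarith
      · rcases hnew p h with h1 | h1
        · exact absurd h1 hp0
        · rw [hgP3, hδq]
          have h1' := pvδ_nonneg p (pvC1 R q)
          have h2' := pvδ_nonneg p (pvC2 R q)
          nlinarith
    · intro p
      rw [hgP3]
      by_cases hpq : p = q
      · have h3 : pvδ p q = 1 := by simp [pvδ, hpq]
        have hr : c ≤ P.getD p 0 := by
          rw [hpq]; exact hrest (q, c) List.mem_cons_self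
        have h1 := pvδ_nonneg p (pvC1 R q)
        have h2 := pvδ_nonneg p (pvC2 R q)
        nlinarith
      · have h3 : pvδ p q = 0 := by simp [pvδ, hpq]
        have h1 := pvδ_nonneg p (pvC1 R q)
        have h2 := pvδ_nonneg p (pvC2 R q)
        have := hPnn p
        nlinarith
    · intro s hs
      rcases (hm1 s).1 hs with h | h
      · subst h
        rw [hgL1, pvδ_self, mul_one]
        by_cases hsL : pvMid R q ∈ L.keys
        · have := hLpos _ hsL; omega
        · have hL0 : L.getD (pvMid R q) 0 = 0 := pv_getD_of_not_mem_keys L _ hsL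
          rcases lt_or_eq_of_le hcnn with hc | hc
          · omega
          · obtain ⟨-, -, hpos0⟩ := hzero hc.symm
            have := hLlb (pvMid R q)
            omega
      · rw [hgL1]
        have := hLpos s h
        have := pvδ_nonneg s (pvMid R q)
        nlinarith
    · intro s
      rw [hgL1]
      have := hLlb s
      have := pvδ_nonneg s (pvMid R q)
      nlinarith

/-- A's outer loop: it returns, and the letter counts pick up the inserted-letter sums. -/
lemma pvA_loop (R : PySem.Dict String String) (polymer : String) :
    ∀ (k : Nat) (P L : SDict), pvInvA R polymer k P L →
    ∃ P' L', solveLoopA R k (some (P, L)) = some (P', L') ∧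
      L'.keys.Nodup ∧ (∀ s ∈ L'.keys, 0 < L'.getD s 0) ∧
      String.ofList [polymer.toList.headD ' '] ∈ L'.keys ∧
      ∀ s, L'.getD s 0 = L.getD s 0 + pvWsum P (fun p => pvIns R k p s) := by
  intro k
  induction k with
  | zero =>
    intro P L hI
    refine ⟨P, L, rfl, hI.Lnd, hI.Lpos, hI.Lhead, ?_⟩
    intro s
    have : pvWsum P (fun p => pvIns R 0 p s) = 0 := by
      unfold pvWsum
      have hz : ∀ kc ∈ P.items, kc.2 * pvIns R 0 kc.1 s = 0 := by
        intro kc _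
        show kc.2 * 0 = 0
        ring
      rw [List.map_congr_left hz]
      simp
    omega
  | succ k ih =>
    intro P L hI
    have hgood : ∀ kc ∈ P.items, pvGoodB R kc.1 = true := by
      intro kc hkc
      exact (hI.Psafe _ (PySem.Dict.mem_keys_of_mem_items P hkc)).1
    have hin : ∀ kc ∈ P.items, kc.1 ∈ P.keys :=
      fun kc hkc => PySem.Dict.mem_keys_of_mem_items P hkc
    obtain ⟨P1, L1, hfold, hwP, hwL, hP1nd, hL1nd, hPk, hLk, hup⟩ :=
      pv_foldA_spec R P.items P L hI.Pnd hI.Lnd hgood hin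
    have hkeysfst : P.items.map Prod.fst = P.keys := rfl
    have hitem_val : ∀ kc ∈ P.items, kc.2 = P.getD kc.1 0 := by
      intro kc hkc
      exact (PySem.Dict.getD_of_mem_items P (by simpa using hkc) hI.Pnd 0).symm
    obtain ⟨hJall, hnew1, hPnn1, hLpos1⟩ :=
      pv_foldA_inv R P L hI.Pnd hI.Ppos
        (fun q hq => (hI.Psafe q hq).1) hI.Pnn P.items P L
        (fun _ hx => hx) (hkeysfst ▸ hI.Pnd)
        (fun kc hkc => le_of_eq (hitem_val kc hkc))
        (fun q hq => Or.inl (hkeysfst ▸ hq))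
        (fun _ hq => hq) (fun p hp => Or.inl hp) hI.Pnn hI.Lpos
        (fun _ => le_refl _) hI.Pnd hI.Lnd P1 L1 hfold
    have hI1 : pvInvA R polymer k P1 L1 := by
      refine ⟨hP1nd, hL1nd, ?_, hPnn1, ?_, hLpos1, hLk _ hI.Lhead⟩
      · intro p hp
        rcases hup p hp with hold | ⟨kc, hkc, hor⟩
        · exact pvSafe_mono R k p (hI.Psafe p hold)
        · have hs := hI.Psafe kc.1 (hin kc hkc)
          rcases hor with rfl | rfl
          · exact hs.2.1
          · exact hs.2.2
      · intro p hp
        rcases hnew1 p hp with hold | hposp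
        · exact Or.inr (hJall p hold)
        · exact Or.inl hposp
    obtain ⟨P', L', hloop, hnd', hpos', hhead', hval⟩ := ih P1 L1 hI1
    refine ⟨P', L', ?_, hnd', hpos', hhead', ?_⟩
    · show solveLoopA R k ((some (P, L)).bind (solveInnerA R)) = _
      have : (some (P, L)).bind (solveInnerA R) = some (P1, L1) := by
        show solveInnerA R (P, L) = some (P1, L1)
        exact hfold
      rw [this]
      exact hloop
    · intro s
      have h1 := hval s
      have hL1s : L1.getD s 0 = L.getD s 0 + pvWsum P (fun p => pvδ s (pvMid R p)) := by
        have := hwL (fun x => pvδ s x)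
        rw [pv_wsum_delta L1 hL1nd s, pv_wsum_delta L hI.Lnd s] at this
        exact this
      have hP1w : pvWsum P1 (fun p => pvIns R k p s)
          = pvWsum P (fun p => pvIns R k (pvC1 R p) s + pvIns R k (pvC2 R p) s) := by
        have h2 := hwP (fun p => pvIns R k p s)
        have h3 : (P.items.map (fun kc => kc.2 *
            (pvIns R k (pvC1 R kc.1) s + pvIns R k (pvC2 R kc.1) s - pvIns R k kc.1 s))).sum
            = pvWsum P (fun p =>
                (pvIns R k (pvC1 R p) s + pvIns R k (pvC2 R p) s) - pvIns R k p s) := rfl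
        rw [h3, pv_wsum_sub P (fun p => pvIns R k (pvC1 R p) s + pvIns R k (pvC2 R p) s)
          (fun p => pvIns R k p s)] at h2
        omega
      have hsum : pvWsum P (fun p => pvδ s (pvMid R p))
            + pvWsum P (fun p => pvIns R k (pvC1 R p) s + pvIns R k (pvC2 R p) s)
          = pvWsum P (fun p => pvIns R (k + 1) p s) := by
        rw [← pv_wsum_add]
        refine pv_wsum_congr_fn P _ _ ?_
        intro p _
        show pvδ s (pvMid R p) + _ = pvIns R k (pvC1 R p) s + pvIns R k (pvC2 R p) s
          + pvδ s (pvMid R p)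
        ring
      rw [h1, hL1s, hP1w]
      omega


-- ---------- accumulation folds used by B ----------

lemma pv_addInto_getD : ∀ (l : List (String × Int)) (acc : SDict) (s : String),
    (dictAddInto acc l).getD s 0
      = acc.getD s 0 + (l.map (fun lc => lc.2 * pvδ s lc.1)).sum := by
  intro l
  induction l with
  | nil => intro acc s; simp [dictAddInto]
  | cons lc t ih =>
    intro acc s
    show (dictAddInto (acc.insert lc.1 (acc.getD lc.1 0 + lc.2)) t).getD s 0 = _
    rw [ih, pv_getD_shift]
    simp only [List.map_cons, List.sum_cons]
    ring

lemma pv_addInto_nodup : ∀ (l : List (String × Int)) (acc : SDict),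
    acc.keys.Nodup → (dictAddInto acc l).keys.Nodup := by
  intro l
  induction l with
  | nil => intro acc h; exact h
  | cons lc t ih =>
    intro acc h
    exact ih _ (PySem.Dict.nodup_keys_insert _ _ _ h)

lemma pv_addInto_keys : ∀ (l : List (String × Int)) (acc : SDict) (s : String),
    s ∈ (dictAddInto acc l).keys ↔ s ∈ acc.keys ∨ s ∈ l.map Prod.fst := by
  intro l
  induction l with
  | nil => intro acc s; simp [dictAddInto]
  | cons lc t ih =>
    intro acc s
    show s ∈ (dictAddInto (acc.insert lc.1 (acc.getD lc.1 0 + lc.2)) t).keys ↔ _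
    rw [ih, PySem.Dict.mem_keys_insert]
    simp only [List.map_cons, List.mem_cons]
    tauto

lemma pv_addInto_dict (d : SDict) (hd : d.keys.Nodup) (acc : SDict) (s : String) :
    (dictAddInto acc d.items).getD s 0 = acc.getD s 0 + d.getD s 0 := by
  rw [pv_addInto_getD]
  have h : (d.items.map (fun lc => lc.2 * pvδ s lc.1)).sum
      = pvWsum d (fun x => pvδ s x) := rfl
  rw [h, pv_wsum_delta d hd s]

lemma pv_addInto_pos (l : List (String × Int)) (acc : SDict)
    (hacc : ∀ s ∈ acc.keys, 0 < acc.getD s 0) (hl : ∀ lc ∈ l, 0 < lc.2) :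
    ∀ s ∈ (dictAddInto acc l).keys, 0 < (dictAddInto acc l).getD s 0 := by
  intro s hs
  rw [pv_addInto_getD]
  have hnn : ∀ x ∈ l.map (fun lc => lc.2 * pvδ s lc.1), 0 ≤ x := by
    intro x hx
    obtain ⟨lc, hlc, rfl⟩ := List.mem_map.1 hx
    have := hl lc hlc
    have := pvδ_nonneg s lc.1
    nlinarith
  have hsum_nn : 0 ≤ (l.map (fun lc => lc.2 * pvδ s lc.1)).sum := List.sum_nonneg hnn
  have hann := pv_getD_nonneg_of_pos_keys acc hacc s
  rcases (pv_addInto_keys l acc s).1 hs with h | h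
  · have := hacc s h
    omega
  · obtain ⟨lc, hlc, hfst⟩ := List.mem_map.1 h
    have hterm : lc.2 * pvδ s lc.1 ∈ l.map (fun lc => lc.2 * pvδ s lc.1) :=
      List.mem_map.2 ⟨lc, hlc, rfl⟩
    have hδ : pvδ s lc.1 = 1 := by simp [pvδ, hfst.symm]
    have := List.single_le_sum hnn _ hterm
    have := hl lc hlc
    nlinarith

-- the letter-count fold over the polymer's characters
lemma pv_cfold_getD : ∀ (cs : List Char) (d : SDict) (s : String),
    (cs.foldl (fun d ch => d.insert (String.ofList [ch]) (d.getD (String.ofList [ch]) 0 + 1)) d).getD s 0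
      = d.getD s 0 + (cs.map (fun ch => pvδ s (String.ofList [ch]))).sum := by
  intro cs
  induction cs with
  | nil => intro d s; simp
  | cons ch t ih =>
    intro d s
    rw [List.foldl_cons, ih, pv_getD_shift]
    simp only [List.map_cons, List.sum_cons]
    ring

lemma pv_cfold_keys : ∀ (cs : List Char) (d : SDict) (s : String),
    s ∈ (cs.foldl (fun d ch => d.insert (String.ofList [ch]) (d.getD (String.ofList [ch]) 0 + 1)) d).keys
      ↔ (∃ ch ∈ cs, s = String.ofList [ch]) ∨ s ∈ d.keys := by
  intro cs
  induction cs with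
  | nil => intro d s; simp
  | cons ch t ih =>
    intro d s
    rw [List.foldl_cons, ih]
    rw [PySem.Dict.mem_keys_insert]
    constructor
    · rintro (⟨x, hx, rfl⟩ | (h | h))
      · exact Or.inl ⟨x, List.mem_cons_of_mem _ hx, rfl⟩
      · exact Or.inl ⟨ch, List.mem_cons_self, h⟩
      · exact Or.inr h
    · rintro (⟨x, hx, rfl⟩ | h)
      · rcases List.mem_cons.1 hx with rfl | hx'
        · exact Or.inr (Or.inl rfl)
        · exact Or.inl ⟨x, hx', rfl⟩
      · exact Or.inr (Or.inr h)

lemma pv_cfold_nodup : ∀ (cs : List Char) (d : SDict), d.keys.Nodup →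
    (cs.foldl (fun d ch => d.insert (String.ofList [ch]) (d.getD (String.ofList [ch]) 0 + 1)) d).keys.Nodup := by
  intro cs
  induction cs with
  | nil => intro d h; exact h
  | cons ch t ih =>
    intro d h
    exact ih _ (PySem.Dict.nodup_keys_insert _ _ _ h)

-- ---------- B's BFS ----------

/-- effect of one level's fold of B's BFS over the frontier. -/
lemma pv_bfsFold (R : PySem.Dict String String) :
    ∀ (fr : List String) (mid : PySem.Dict String String) (fresh : List String),
    mid.keys.Nodup →
    (∀ p ∈ fr, pvGoodB R p = true) →
    ∃ mid' fresh', fr.foldl (bfsStepB R) (some (mid, fresh)) = some (mid', fresh') ∧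
      mid'.keys.Nodup ∧
      (∀ p, p ∈ mid'.keys ↔ p ∈ mid.keys ∨ p ∈ fr) ∧
      (∀ p v, mid'.get? p = some v → mid.get? p = some v ∨ R.get? p = some v) ∧
      (∀ q ∈ fresh, q ∈ fresh') ∧
      (∀ q ∈ fresh', q ∈ fresh ∨ ∃ p ∈ fr, q = pvC1 R p ∨ q = pvC2 R p) ∧
      (∀ p ∈ fr, p ∈ mid.keys ∨ (pvC1 R p ∈ fresh' ∧ pvC2 R p ∈ fresh')) := by
  intro fr
  induction fr with
  | nil =>
    intro mid fresh hnd _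
    exact ⟨mid, fresh, rfl, hnd, by simp, fun p v h => Or.inl h, fun q h => h,
      fun q h => Or.inl h, by simp⟩
  | cons p t ih =>
    intro mid fresh hnd hg
    have hgp := hg p List.mem_cons_self
    obtain ⟨hmid, c0, c1, rest, hq⟩ := pv_good_facts R p hgp
    obtain ⟨hg0, hg1⟩ := pv_pyGet01 p c0 c1 rest hq
    obtain ⟨hk1, hk2⟩ := pv_children_eq R p c0 c1 rest hq
    rcases hcon : mid.contains p with hfalse | htrue
    · -- p not yet visited: record its rule and enqueue both successors
      have hstep : bfsStepB R (some (mid, fresh)) p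
          = some (mid.insert p (pvMid R p),
              fresh ++ [pvC1 R p] ++ [pvC2 R p]) := by
        simp only [bfsStepB, Option.bind, hcon, hmid, hg0, hg1, hk1, hk2]
        rfl
      obtain ⟨mid', fresh', hfold, hnd', hkeys', hval', hmono', hup', hcov'⟩ :=
        ih (mid.insert p (pvMid R p)) (fresh ++ [pvC1 R p] ++ [pvC2 R p])
          (PySem.Dict.nodup_keys_insert _ _ _ hnd)
          (fun x hx => hg x (List.mem_cons_of_mem _ hx))
      refine ⟨mid', fresh', ?_, hnd', ?_, ?_, ?_, ?_, ?_⟩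
      · rw [List.foldl_cons, hstep]; exact hfold
      · intro x
        rw [hkeys' x, PySem.Dict.mem_keys_insert]
        simp only [List.mem_cons]
        tauto
      · intro x v hx
        rcases hval' x v hx with h | h
        · rw [PySem.Dict.get?_insert] at h
          split_ifs at h with hxp
          · subst hxp
            cases h
            exact Or.inr hmid
          · exact Or.inl h
        · exact Or.inr h
      · intro q hqf
        exact hmono' q (by simp [hqf])
      · intro q hq
        rcases hup' q hq with h | ⟨x, hx, hor⟩
        · simp only [List.append_assoc, List.mem_append, List.mem_singleton] at h
          rcases h with h | h | h
          · exact Or.inl h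
          · exact Or.inr ⟨p, List.mem_cons_self, Or.inl h⟩
          · exact Or.inr ⟨p, List.mem_cons_self, Or.inr h⟩
        · exact Or.inr ⟨x, List.mem_cons_of_mem _ hx, hor⟩
      · intro x hx
        rcases List.mem_cons.1 hx with rfl | hxt
        · exact Or.inr ⟨hmono' _ (by simp), hmono' _ (by simp)⟩
        · rcases hcov' x hxt with h | h
          · rw [PySem.Dict.mem_keys_insert] at h
            rcases h with rfl | h
            · exact Or.inr ⟨hmono' _ (by simp), hmono' _ (by simp)⟩
            · exact Or.inl h
          · exact Or.inr h
    · -- p already visited: skipped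
      have hstep : bfsStepB R (some (mid, fresh)) p = some (mid, fresh) := by
        simp only [bfsStepB, Option.bind, hcon]
        rfl
      obtain ⟨mid', fresh', hfold, hnd', hkeys', hval', hmono', hup', hcov'⟩ :=
        ih mid fresh hnd (fun x hx => hg x (List.mem_cons_of_mem _ hx))
      refine ⟨mid', fresh', ?_, hnd', ?_, hval', hmono', ?_, ?_⟩
      · rw [List.foldl_cons, hstep]; exact hfold
      · intro x
        rw [hkeys' x]
        simp only [List.mem_cons]
        constructor
        · rintro (h | h)
          · exact Or.inl h
          · exact Or.inr (Or.inr h)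
        · rintro (h | h' | h)
          · exact Or.inl h
          · exact Or.inl (h' ▸ (PySem.Dict.contains_iff_mem_keys mid p).1 hcon)
          · exact Or.inr h
      · intro q hq
        rcases hup' q hq with h | ⟨x, hx, hor⟩
        · exact Or.inl h
        · exact Or.inr ⟨x, List.mem_cons_of_mem _ hx, hor⟩
      · intro x hx
        rcases List.mem_cons.1 hx with hxp | hxt
        · exact Or.inl (hxp ▸ (PySem.Dict.contains_iff_mem_keys mid p).1 hcon)
        · exact hcov' x hxt

/-- B's BFS loop, tracked against the level sets pvU. -/
lemma pv_bfsLoop (R : PySem.Dict String String) (poly : String) (N : Nat)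
    (HG : ∀ m, m < N → ∀ p ∈ pvU R poly m, pvGoodB R p = true) :
    ∀ (fuel j : Nat) (frontier : List String) (mid : PySem.Dict String String),
    j + fuel = N →
    mid.keys.Nodup →
    (∀ p ∈ frontier, p ∈ pvU R poly j) →
    (∀ p ∈ pvU R poly j, p ∈ mid.keys ∨ p ∈ frontier) →
    (∀ m, m < j → ∀ p ∈ pvU R poly m, p ∈ mid.keys) →
    (∀ p ∈ mid.keys, pvGoodB R p = true) →
    (∀ p v, mid.get? p = some v → R.get? p = some v) →
    (∀ p ∈ mid.keys, (pvC1 R p ∈ mid.keys ∨ pvC1 R p ∈ frontier)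
                   ∧ (pvC2 R p ∈ mid.keys ∨ pvC2 R p ∈ frontier)) →
    ∃ mid', bfsLoopB R fuel frontier mid = some mid' ∧
      mid'.keys.Nodup ∧
      (∀ p ∈ mid'.keys, pvGoodB R p = true) ∧
      (∀ p v, mid'.get? p = some v → R.get? p = some v) ∧
      (∀ m, m < N → ∀ p ∈ pvU R poly m, p ∈ mid'.keys) := by
  intro fuel
  induction fuel with
  | zero =>
    intro j frontier mid hjN hnd _ _ hpast hgood hval _
    refine ⟨mid, rfl, hnd, hgood, hval, ?_⟩
    intro m hm
    exact hpast m (by omega)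
  | succ fuel ih =>
    intro j frontier mid hjN hnd hfr1 hfr2 hpast hgood hval hclose
    by_cases hfe : frontier = []
    · -- early exit: the reachable set is saturated and fully recorded
      subst hfe
      have hUj : ∀ p ∈ pvU R poly j, p ∈ mid.keys := by
        intro p hp
        rcases hfr2 p hp with h | h
        · exact h
        · simp at h
      have hall : ∀ m, ∀ p ∈ pvU R poly m, p ∈ mid.keys := by
        intro m
        induction m with
        | zero =>
          intro p hp
          exact hUj p (pvU_mono R poly (Nat.zero_le j) p hp)
        | succ m ihm =>
          intro p hp
          rcases (pvU_mem_succ R poly m p).1 hp with h | ⟨q, hq, hgq, hpk⟩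
          · exact ihm p h
          · have hqm := ihm q hq
            have := hclose q hqm
            simp only [pvKids, List.mem_cons, List.not_mem_nil, or_false] at hpk
            rcases hpk with rfl | rfl
            · rcases this.1 with h | h
              · exact h
              · simp at h
            · rcases this.2 with h | h
              · exact h
              · simp at h
      refine ⟨mid, ?_, hnd, hgood, hval, ?_⟩
      · show (if ([] : List String).isEmpty then some mid else _) = some mid
        rfl
      · intro m _
        exact hall m
    · -- process one BFS level
      have hjlt : j < N := by omega
      obtain ⟨mid1, fresh1, hfold, hnd1, hkeys1, hval1, _, hup1, hcov1⟩ :=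
        pv_bfsFold R frontier mid [] hnd
          (fun p hp => HG j hjlt p (hfr1 p hp))
      have hmid1get : ∀ p v, mid1.get? p = some v → R.get? p = some v := by
        intro p v h
        rcases hval1 p v h with h1 | h1
        · exact hval p v h1
        · exact h1
      have hfresh1U : ∀ q ∈ fresh1, q ∈ pvU R poly (j + 1) := by
        intro q hq
        rcases hup1 q hq with h | ⟨p, hp, hor⟩
        · simp at h
        · have hpU := hfr1 p hp
          have hpg := HG j hjlt p hpU
          obtain ⟨h1, h2⟩ := pvU_kid_mem R poly j p hpU hpg
          rcases hor with rfl | rfl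
          · exact h1
          · exact h2
      have hU1 : ∀ p ∈ pvU R poly (j + 1), p ∈ mid1.keys ∨ p ∈ fresh1 := by
        intro p hp
        rcases (pvU_mem_succ R poly j p).1 hp with h | ⟨q, hq, hgq, hpk⟩
        · left
          rw [hkeys1 p]
          exact hfr2 p h
        · simp only [pvKids, List.mem_cons, List.not_mem_nil, or_false] at hpk
          rcases hfr2 q hq with hqm | hqf
          · have := hclose q hqm
            rcases hpk with rfl | rfl
            · rcases this.1 with h1 | h1
              · exact Or.inl ((hkeys1 _).2 (Or.inl h1))
              · exact Or.inl ((hkeys1 _).2 (Or.inr h1))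
            · rcases this.2 with h1 | h1
              · exact Or.inl ((hkeys1 _).2 (Or.inl h1))
              · exact Or.inl ((hkeys1 _).2 (Or.inr h1))
          · rcases hcov1 q hqf with hqm | ⟨hc1, hc2⟩
            · have := hclose q hqm
              rcases hpk with rfl | rfl
              · rcases this.1 with h1 | h1
                · exact Or.inl ((hkeys1 _).2 (Or.inl h1))
                · exact Or.inl ((hkeys1 _).2 (Or.inr h1))
              · rcases this.2 with h1 | h1
                · exact Or.inl ((hkeys1 _).2 (Or.inl h1))
                · exact Or.inl ((hkeys1 _).2 (Or.inr h1))
            · rcases hpk with rfl | rfl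
              · exact Or.inr hc1
              · exact Or.inr hc2
      obtain ⟨mid', hloop, hnd', hgood', hval', hpast'⟩ :=
        ih (j + 1) fresh1 mid1 (by omega) hnd1 hfresh1U hU1
          (by
            intro m hm p hp
            rcases Nat.lt_or_ge m j with h1 | h1
            · exact (hkeys1 p).2 (Or.inl (hpast m h1 p hp))
            · have hmj : m = j := by omega
              subst hmj
              rcases hfr2 p hp with h | h
              · exact (hkeys1 p).2 (Or.inl h)
              · exact (hkeys1 p).2 (Or.inr h))
          (by
            intro p hp
            rcases (hkeys1 p).1 hp with h | h
            · exact hgood p h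
            · exact HG j hjlt p (hfr1 p h))
          hmid1get
          (by
            intro p hp
            rcases (hkeys1 p).1 hp with h | h
            · have := hclose p h
              constructor
              · rcases this.1 with h1 | h1
                · exact Or.inl ((hkeys1 _).2 (Or.inl h1))
                · exact Or.inl ((hkeys1 _).2 (Or.inr h1))
              · rcases this.2 with h1 | h1
                · exact Or.inl ((hkeys1 _).2 (Or.inl h1))
                · exact Or.inl ((hkeys1 _).2 (Or.inr h1))
            · rcases hcov1 p h with h1 | ⟨hc1, hc2⟩
              · have := hclose p h1
                constructor
                · rcases this.1 with h2 | h2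
                  · exact Or.inl ((hkeys1 _).2 (Or.inl h2))
                  · exact Or.inl ((hkeys1 _).2 (Or.inr h2))
                · rcases this.2 with h2 | h2
                  · exact Or.inl ((hkeys1 _).2 (Or.inl h2))
                  · exact Or.inl ((hkeys1 _).2 (Or.inr h2))
              · exact ⟨Or.inr hc1, Or.inr hc2⟩)
      refine ⟨mid', ?_, hnd', hgood', hval', hpast'⟩
      show (if frontier.isEmpty then some mid
        else (frontier.foldl (bfsStepB R) (some (mid, []))).bind
          (fun mf => bfsLoopB R fuel mf.2 mf.1)) = some mid'
      rw [if_neg (by simpa using hfe), hfold]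
      exact hloop


-- ---------- B's DP over the depth ----------

def pvEProp (R mid : PySem.Dict String String) (k : Nat) (p : String) (e : SDict) : Prop :=
  e.keys.Nodup ∧ (∀ s ∈ e.keys, 0 < e.getD s 0) ∧
  (pvCov R mid k p → ∀ s, e.getD s 0 = pvIns R k p s)

def pvInsInv (R mid : PySem.Dict String String) (k : Nat)
    (T : PySem.Dict String SDict) : Prop :=
  T.keys.Nodup ∧ (∀ p, p ∈ T.keys ↔ p ∈ mid.keys) ∧
  (∀ p e, T.get? p = some e → pvEProp R mid k p e)

lemma pv_insinv_getD (R mid : PySem.Dict String String) (k : Nat)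
    (T : PySem.Dict String SDict) (hinv : pvInsInv R mid k T) (q : String) :
    (T.getD q PySem.Dict.empty).keys.Nodup ∧
    (∀ s ∈ (T.getD q PySem.Dict.empty).keys, 0 < (T.getD q PySem.Dict.empty).getD s 0) ∧
    (pvCov R mid k q → q ∈ mid.keys →
      ∀ s, (T.getD q PySem.Dict.empty).getD s 0 = pvIns R k q s) ∧
    (q ∉ mid.keys → ∀ s, (T.getD q PySem.Dict.empty).getD s 0 = 0) := by
  obtain ⟨hTnd, hTkeys, hTent⟩ := hinv
  rcases hq : T.get? q with _ | e
  · have h0 : T.getD q PySem.Dict.empty = PySem.Dict.empty := by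
      rw [PySem.Dict.getD_eq_get?_getD, hq]
      rfl
    rw [h0]
    refine ⟨by simp [PySem.Dict.keys_empty], by simp [PySem.Dict.keys_empty], ?_, ?_⟩
    · intro _ hqm _
      exact absurd ((hTkeys q).2 hqm)
        ((PySem.Dict.get?_eq_none_iff_not_mem_keys T q).1 hq)
    · intro _ s
      exact PySem.Dict.getD_empty _ _
  · have h0 : T.getD q PySem.Dict.empty = e := by
      rw [PySem.Dict.getD_eq_get?_getD, hq]
      rfl
    obtain ⟨he1, he2, he3⟩ := hTent q e hq
    rw [h0]
    refine ⟨he1, he2, fun hc _ => he3 hc, ?_⟩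
    intro hqm
    exact absurd ((hTkeys q).1 (PySem.Dict.mem_keys_of_mem_items T
      (PySem.Dict.mem_items_of_get?_eq_some T hq))) hqm

lemma pv_items_pos (e : SDict) (hnd : e.keys.Nodup)
    (hpos : ∀ s ∈ e.keys, 0 < e.getD s 0) : ∀ lc ∈ e.items, 0 < lc.2 := by
  intro lc hlc
  have := PySem.Dict.getD_of_mem_items e (by simpa using hlc) hnd 0
  rw [← this]
  exact hpos _ (PySem.Dict.mem_keys_of_mem_items e hlc)

lemma pv_dpEntry (R mid : PySem.Dict String String) (k : Nat)
    (ins : PySem.Dict String SDict) (hinv : pvInsInv R mid k ins) (p m : String)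
    (hm : R.get? p = some m) (hgood : pvGoodB R p = true) :
    ∃ e, dpEntryB ins p m = some e ∧ pvEProp R mid (k + 1) p e := by
  obtain ⟨hmid', c0, c1, rest, hq⟩ := pv_good_facts R p hgood
  have hmeq : pvMid R p = m := by
    rw [hmid'] at hm
    exact Option.some.inj hm
  obtain ⟨hg0, hg1⟩ := pv_pyGet01 p c0 c1 rest hq
  obtain ⟨hk1, hk2⟩ := pv_children_eq R p c0 c1 rest hq
  rw [hmeq] at hk1 hk2
  set E1 := ins.getD (pvC1 R p) PySem.Dict.empty with hE1
  set E2 := ins.getD (pvC2 R p) PySem.Dict.empty with hE2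
  obtain ⟨hE1nd, hE1pos, hE1val, hE1out⟩ := pv_insinv_getD R mid k ins hinv (pvC1 R p)
  obtain ⟨hE2nd, hE2pos, hE2val, hE2out⟩ := pv_insinv_getD R mid k ins hinv (pvC2 R p)
  set a1 := dictAddInto PySem.Dict.empty E1.items with ha1
  set a2 := dictAddInto a1 E2.items with ha2
  set e := a2.insert m (a2.getD m 0 + 1) with he
  have hrun : dpEntryB ins p m = some e := by
    simp only [dpEntryB, hg0, hg1, hk1, hk2]
    rfl
  have ha1nd : a1.keys.Nodup := pv_addInto_nodup _ _ (by simp [PySem.Dict.keys_empty])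
  have ha2nd : a2.keys.Nodup := pv_addInto_nodup _ _ ha1nd
  have ha1pos : ∀ s ∈ a1.keys, 0 < a1.getD s 0 :=
    pv_addInto_pos _ _ (by simp [PySem.Dict.keys_empty]) (pv_items_pos E1 hE1nd hE1pos)
  have ha2pos : ∀ s ∈ a2.keys, 0 < a2.getD s 0 :=
    pv_addInto_pos _ _ ha1pos (pv_items_pos E2 hE2nd hE2pos)
  have hga2 : ∀ s, a2.getD s 0 = E1.getD s 0 + E2.getD s 0 := by
    intro s
    rw [ha2, pv_addInto_dict E2 hE2nd, ha1, pv_addInto_dict E1 hE1nd,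
      PySem.Dict.getD_empty]
    ring
  refine ⟨e, hrun, PySem.Dict.nodup_keys_insert _ _ _ ha2nd, ?_, ?_⟩
  · intro s hs
    rw [he, PySem.Dict.getD_insert]
    split_ifs with hsm
    · have := pv_getD_nonneg_of_pos_keys a2 ha2pos m
      omega
    · rw [he, PySem.Dict.mem_keys_insert] at hs
      rcases hs with h | h
      · exact absurd h hsm
      · exact ha2pos s h
  · rintro ⟨hpK, hcov1, hcov2⟩ s
    have hv1 : E1.getD s 0 = pvIns R k (pvC1 R p) s := by
      by_cases hmem : pvC1 R p ∈ mid.keys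
      · exact hE1val hcov1 hmem s
      · rcases k with _ | k'
        · rw [hE1out hmem s]
          rfl
        · exact absurd hcov1.1 hmem
    have hv2 : E2.getD s 0 = pvIns R k (pvC2 R p) s := by
      by_cases hmem : pvC2 R p ∈ mid.keys
      · exact hE2val hcov2 hmem s
      · rcases k with _ | k'
        · rw [hE2out hmem s]
          rfl
        · exact absurd hcov2.1 hmem
    have hshift : e.getD s 0 = a2.getD s 0 + 1 * pvδ s m := by
      rw [he]
      exact pv_getD_shift a2 m 1 s
    rw [hshift, hga2, hv1, hv2]
    show _ = pvIns R k (pvC1 R p) s + pvIns R k (pvC2 R p) s + pvδ s (pvMid R p)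
    rw [hmeq]
    ring

lemma pv_dpRoundAux (R mid : PySem.Dict String String) (hmidnd : mid.keys.Nodup)
    (hval : ∀ p v, mid.get? p = some v → R.get? p = some v)
    (hgood : ∀ p ∈ mid.keys, pvGoodB R p = true) (k : Nat)
    (ins : PySem.Dict String SDict) (hinv : pvInsInv R mid k ins) :
    ∀ (ℓ : List (String × String)), (∀ x ∈ ℓ, x ∈ mid.items) →
    ∀ (nxt : PySem.Dict String SDict), nxt.keys.Nodup →
    (∀ p e, nxt.get? p = some e → pvEProp R mid (k + 1) p e) →
    ∃ nxt', ℓ.foldl (fun acc pm => acc.bind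
        (fun nxt => (dpEntryB ins pm.1 pm.2).map (fun e => nxt.insert pm.1 e))) (some nxt)
        = some nxt' ∧
      nxt'.keys.Nodup ∧
      (∀ p, p ∈ nxt'.keys ↔ p ∈ nxt.keys ∨ p ∈ ℓ.map Prod.fst) ∧
      (∀ p e, nxt'.get? p = some e → pvEProp R mid (k + 1) p e) := by
  intro ℓ
  induction ℓ with
  | nil =>
    intro _ nxt hnd hent
    exact ⟨nxt, rfl, hnd, by simp, hent⟩
  | cons pm t ih =>
    intro hsub nxt hnd hent
    have hpm : pm ∈ mid.items := hsub pm List.mem_cons_self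
    have hgetm : mid.get? pm.1 = some pm.2 :=
      PySem.Dict.get?_of_mem_items mid (by simpa using hpm) hmidnd
    obtain ⟨e, hrun, heprop⟩ := pv_dpEntry R mid k ins hinv pm.1 pm.2
      (hval _ _ hgetm) (hgood _ (PySem.Dict.mem_keys_of_mem_items mid hpm))
    obtain ⟨nxt', hfold, hnd', hkeys', hent'⟩ :=
      ih (fun x hx => hsub x (List.mem_cons_of_mem _ hx)) (nxt.insert pm.1 e)
        (PySem.Dict.nodup_keys_insert _ _ _ hnd)
        (by
          intro x ex hx
          rw [PySem.Dict.get?_insert] at hx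
          split_ifs at hx with hxp
          · subst hxp
            cases hx
            exact heprop
          · exact hent x ex hx)
    refine ⟨nxt', ?_, hnd', ?_, hent'⟩
    · have hstep : ((some nxt).bind
          (fun nxt => (dpEntryB ins pm.1 pm.2).map (fun e => nxt.insert pm.1 e)))
          = some (nxt.insert pm.1 e) := by
        rw [hrun]
        rfl
      rw [List.foldl_cons, hstep]
      exact hfold
    · intro x
      rw [hkeys' x, PySem.Dict.mem_keys_insert]
      simp only [List.map_cons, List.mem_cons]
      tauto


lemma pv_dpRound (R mid : PySem.Dict String String) (hmidnd : mid.keys.Nodup)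
    (hval : ∀ p v, mid.get? p = some v → R.get? p = some v)
    (hgood : ∀ p ∈ mid.keys, pvGoodB R p = true) (k : Nat)
    (ins : PySem.Dict String SDict) (hinv : pvInsInv R mid k ins) :
    ∃ ins', dpRoundB mid ins = some ins' ∧ pvInsInv R mid (k + 1) ins' := by
  obtain ⟨nxt', hfold, hnd', hkeys', hent'⟩ :=
    pv_dpRoundAux R mid hmidnd hval hgood k ins hinv mid.items (fun _ hx => hx)
      PySem.Dict.empty (by simp [PySem.Dict.keys_empty])
      (by
        intro p e hp
        rw [PySem.Dict.get?_empty] at hp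
        cases hp)
  refine ⟨nxt', hfold, hnd', ?_, hent'⟩
  intro p
  rw [hkeys' p]
  have : (mid.items.map Prod.fst) = mid.keys := rfl
  rw [this]
  simp [PySem.Dict.keys_empty]

lemma pv_dpLoop (R mid : PySem.Dict String String) (hmidnd : mid.keys.Nodup)
    (hval : ∀ p v, mid.get? p = some v → R.get? p = some v)
    (hgood : ∀ p ∈ mid.keys, pvGoodB R p = true) :
    ∀ (c k : Nat) (ins : PySem.Dict String SDict), pvInsInv R mid k ins →
    ∃ ins', dpLoopB mid c ins = some ins' ∧ pvInsInv R mid (k + c) ins' := by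
  intro c
  induction c with
  | zero =>
    intro k ins hinv
    exact ⟨ins, rfl, hinv⟩
  | succ c ih =>
    intro k ins hinv
    obtain ⟨ins1, hrun1, hinv1⟩ := pv_dpRound R mid hmidnd hval hgood k ins hinv
    obtain ⟨ins', hrun', hinv'⟩ := ih (k + 1) ins1 hinv1
    refine ⟨ins', ?_, by rw [show k + (c + 1) = k + 1 + c by omega]; exact hinv'⟩
    show (dpRoundB mid ins).bind (dpLoopB mid c) = some ins'
    rw [hrun1]
    exact hrun'

lemma pv_ins0 (R mid : PySem.Dict String String) (hmidnd : mid.keys.Nodup) :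
    pvInsInv R mid 0 (mid.items.foldl
      (fun d pm => d.insert pm.1 (PySem.Dict.empty : SDict)) PySem.Dict.empty) := by
  have hkeys : (mid.items.foldl
      (fun d pm => d.insert pm.1 (PySem.Dict.empty : SDict)) PySem.Dict.empty).keys
      = mid.keys := by
    have h1 := PySem.Dict.keys_foldl_insert_key mid.items (fun pm => pm.1)
      (fun _ _ => (PySem.Dict.empty : SDict)) PySem.Dict.empty
    rw [PySem.Dict.keys_empty] at h1
    rw [h1, PySem.Set.update_nil_left]
    have : (mid.items.map (fun pm => pm.1)) = mid.keys := rfl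
    rw [this]
    exact PySem.Set.ofList_eq_self_of_nodup _ hmidnd
  have hent : ∀ (l : List (String × String)) (d : PySem.Dict String SDict),
      (∀ p e, d.get? p = some e → e = PySem.Dict.empty) →
      ∀ p e, (l.foldl (fun d pm => d.insert pm.1 (PySem.Dict.empty : SDict)) d).get? p
        = some e → e = PySem.Dict.empty := by
    intro l
    induction l with
    | nil => intro d h; exact h
    | cons pm t ih =>
      intro d h
      refine ih _ ?_
      intro p e hp
      rw [PySem.Dict.get?_insert] at hp
      split_ifs at hp with hpp
      · exact (Option.some.inj hp).symm
      · exact h p e hp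
  refine ⟨by rw [hkeys]; exact hmidnd, by rw [hkeys]; tauto, ?_⟩
  intro p e hp
  have he : e = PySem.Dict.empty := by
    refine hent mid.items PySem.Dict.empty ?_ p e hp
    intro p' e' hp'
    rw [PySem.Dict.get?_empty] at hp'
    cases hp'
  subst he
  refine ⟨by simp [PySem.Dict.keys_empty], by simp [PySem.Dict.keys_empty], ?_⟩
  intro _ s
  rw [PySem.Dict.getD_empty]
  rfl

-- ---------- B's final count accumulation ----------

lemma pv_countsFold (ins : PySem.Dict String SDict)
    (hE : ∀ p, (ins.getD p PySem.Dict.empty).keys.Nodup ∧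
      ∀ s ∈ (ins.getD p PySem.Dict.empty).keys, 0 < (ins.getD p PySem.Dict.empty).getD s 0) :
    ∀ (bs : List String) (d : SDict), d.keys.Nodup → (∀ s ∈ d.keys, 0 < d.getD s 0) →
    (bs.foldl (fun d p => dictAddInto d (ins.getD p PySem.Dict.empty).items) d).keys.Nodup ∧
    (∀ s ∈ (bs.foldl (fun d p => dictAddInto d (ins.getD p PySem.Dict.empty).items) d).keys,
      0 < (bs.foldl (fun d p => dictAddInto d (ins.getD p PySem.Dict.empty).items) d).getD s 0) ∧
    (∀ s, (bs.foldl (fun d p => dictAddInto d (ins.getD p PySem.Dict.empty).items) d).getD s 0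
      = d.getD s 0 + (bs.map (fun p => (ins.getD p PySem.Dict.empty).getD s 0)).sum) ∧
    (∀ s ∈ d.keys,
      s ∈ (bs.foldl (fun d p => dictAddInto d (ins.getD p PySem.Dict.empty).items) d).keys) := by
  intro bs
  induction bs with
  | nil =>
    intro d hnd hpos
    exact ⟨hnd, hpos, by intro s; simp, fun s hs => hs⟩
  | cons p t ih =>
    intro d hnd hpos
    obtain ⟨hEnd, hEpos⟩ := hE p
    have hnd1 : (dictAddInto d (ins.getD p PySem.Dict.empty).items).keys.Nodup :=
      pv_addInto_nodup _ _ hnd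
    have hpos1 := pv_addInto_pos (ins.getD p PySem.Dict.empty).items d hpos
      (pv_items_pos _ hEnd hEpos)
    obtain ⟨h1, h2, h3, h4⟩ := ih (dictAddInto d (ins.getD p PySem.Dict.empty).items) hnd1 hpos1
    refine ⟨h1, h2, ?_, ?_⟩
    · intro s
      rw [List.foldl_cons, h3 s, pv_addInto_dict _ hEnd]
      simp only [List.map_cons, List.sum_cons]
      ring
    · intro s hs
      refine h4 s ?_
      rw [pv_addInto_keys]
      exact Or.inl hs

-- ---------- reading off the answers ----------

lemma pv_pyGet0 (x : String × Int) (xs : List (String × Int)) :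
    PySem.List.pyGet? (x :: xs) 0 = some x := by
  simp [PySem.List.pyGet?, PySem.List.pyIdx?]

lemma pv_pyGet_neg1 {α : Type} (l : List α) (h : l ≠ []) :
    PySem.List.pyGet? l (-1) = some (l.getLast h) := by
  simp only [PySem.List.pyGet?, PySem.List.pyIdx?]
  have hlen : 1 ≤ l.length := List.length_pos_of_ne_nil h
  norm_num [hlen]
  rw [← List.getLast?_eq_getElem?]
  exact List.getLast?_eq_some_getLast h

lemma pv_last_le (l : List (String × Int)) (hp : l.Pairwise (fun a b => b.2 ≤ a.2)) :
    ∀ (h : l ≠ []), ∀ y ∈ l, (l.getLast h).2 ≤ y.2 := by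
  induction l with
  | nil => intro h; exact absurd rfl h
  | cons x t ih =>
    intro h y hy
    rcases t with _ | ⟨b, t'⟩
    · simp at hy
      subst hy
      simp
    · have htne : (b :: t') ≠ [] := List.cons_ne_nil _ _
      have hlast : (x :: b :: t').getLast h = (b :: t').getLast htne := List.getLast_cons htne
      rcases List.mem_cons.1 hy with rfl | hyt
      · rw [hlast]
        exact (List.pairwise_cons.1 hp).1 _ (List.getLast_mem htne)
      · rw [hlast]
        exact ih (List.pairwise_cons.1 hp).2 htne y hyt

/-- values read off A's final `most_common()` list. -/
lemma pv_A_final (L : SDict) (hkne : L.keys ≠ []) :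
    ∃ most least,
      PySem.List.pyGet? (PySem.List.sorted L.items (fun kv => kv.2) true) 0 = some most ∧
      PySem.List.pyGet? (PySem.List.sorted L.items (fun kv => kv.2) true) (-1) = some least ∧
      most.2 ∈ L.values ∧ least.2 ∈ L.values ∧
      (∀ v ∈ L.values, v ≤ most.2) ∧ (∀ v ∈ L.values, least.2 ≤ v) := by
  have hitems : L.items ≠ [] := by
    intro h
    apply hkne
    show L.items.map (fun p => p.1) = []
    rw [h]
    rfl
  have hsne : PySem.List.sorted L.items (fun kv => kv.2) true ≠ [] := by
    intro h
    exact hitems ((PySem.List.sorted_eq_nil_iff _ _ _).1 h)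
  obtain ⟨m, tl, hsrt⟩ := List.exists_cons_of_ne_nil hsne
  have hperm := PySem.List.sorted_perm L.items (fun kv : String × Int => kv.2) true
  have hvals : ∀ y ∈ L.items, y.2 ∈ L.values := by
    intro y hy
    exact List.mem_map.2 ⟨y, hy, rfl⟩
  have hvals' : ∀ v ∈ L.values, ∃ y ∈ L.items, y.2 = v := by
    intro v hv
    obtain ⟨y, hy, rfl⟩ := List.mem_map.1 hv
    exact ⟨y, hy, rfl⟩
  refine ⟨m, (PySem.List.sorted L.items (fun kv => kv.2) true).getLast hsne, ?_, ?_, ?_, ?_, ?_, ?_⟩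
  · rw [hsrt]; exact pv_pyGet0 m tl
  · exact pv_pyGet_neg1 _ hsne
  · exact hvals m (hperm.mem_iff.1 (hsrt ▸ List.mem_cons_self))
  · exact hvals _ (hperm.mem_iff.1 (List.getLast_mem hsne))
  · intro v hv
    obtain ⟨y, hy, rfl⟩ := hvals' v hv
    exact PySem.List.key_head_sorted_rev_ge L.items (fun kv => kv.2) hsrt y hy
  · intro v hv
    obtain ⟨y, hy, rfl⟩ := hvals' v hv
    exact pv_last_le _ (PySem.List.sorted_pairwise_rev L.items (fun kv : String × Int => kv.2)) hsne
      y (hperm.mem_iff.2 hy)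

/-- max/min of the values of B's dict equal A's most/least common values. -/
lemma pv_maxmin (D1 D2 : SDict) (h1nd : D1.keys.Nodup) (h2nd : D2.keys.Nodup)
    (h1pos : ∀ s ∈ D1.keys, 0 < D1.getD s 0) (h2pos : ∀ s ∈ D2.keys, 0 < D2.getD s 0)
    (heq : ∀ s, D1.getD s 0 = D2.getD s 0) (hne : D1.keys ≠ []) :
    ∃ mx mn, PySem.List.max? D2.values (fun v => v) = some mx ∧
      PySem.List.min? D2.values (fun v => v) = some mn ∧
      mx ∈ D1.values ∧ mn ∈ D1.values ∧
      (∀ v ∈ D1.values, v ≤ mx) ∧ (∀ v ∈ D1.values, mn ≤ v) := by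
  have hmem12 : ∀ s, s ∈ D1.keys → s ∈ D2.keys := by
    intro s hs
    refine pv_contains_of_getD_pos D2 s ?_
    rw [← heq s]
    exact h1pos s hs
  have hmem21 : ∀ s, s ∈ D2.keys → s ∈ D1.keys := by
    intro s hs
    refine pv_contains_of_getD_pos D1 s ?_
    rw [heq s]
    exact h2pos s hs
  have hvk1 : ∀ v ∈ D1.values, ∃ k ∈ D1.keys, v = D1.getD k 0 := by
    intro v hv
    rw [PySem.Dict.values_eq_map_keys D1 h1nd 0] at hv
    obtain ⟨k, hk, rfl⟩ := List.mem_map.1 hv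
    exact ⟨k, hk, rfl⟩
  have hvk2 : ∀ v ∈ D2.values, ∃ k ∈ D2.keys, v = D2.getD k 0 := by
    intro v hv
    rw [PySem.Dict.values_eq_map_keys D2 h2nd 0] at hv
    obtain ⟨k, hk, rfl⟩ := List.mem_map.1 hv
    exact ⟨k, hk, rfl⟩
  have hkv1 : ∀ k ∈ D1.keys, D1.getD k 0 ∈ D1.values := by
    intro k hk
    rw [PySem.Dict.values_eq_map_keys D1 h1nd 0]
    exact List.mem_map.2 ⟨k, hk, rfl⟩
  have hkv2 : ∀ k ∈ D2.keys, D2.getD k 0 ∈ D2.values := by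
    intro k hk
    rw [PySem.Dict.values_eq_map_keys D2 h2nd 0]
    exact List.mem_map.2 ⟨k, hk, rfl⟩
  have hvne : D2.values ≠ [] := by
    obtain ⟨k0, hk0⟩ := List.exists_mem_of_ne_nil D1.keys hne
    have hk2 := hmem12 k0 hk0
    intro h
    rw [h] at hkv2
    exact (List.not_mem_nil) (hkv2 k0 hk2)
  obtain ⟨mx, hmx⟩ : ∃ mx, PySem.List.max? D2.values (fun v => v) = some mx := by
    rcases h : PySem.List.max? D2.values (fun v => v) with _ | mx
    · exact absurd ((PySem.List.max?_eq_none_iff _ _).1 h) hvne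
    · exact ⟨mx, rfl⟩
  obtain ⟨mn, hmn⟩ : ∃ mn, PySem.List.min? D2.values (fun v => v) = some mn := by
    rcases h : PySem.List.min? D2.values (fun v => v) with _ | mn
    · exact absurd ((PySem.List.min?_eq_none_iff _ _).1 h) hvne
    · exact ⟨mn, rfl⟩
  refine ⟨mx, mn, hmx, hmn, ?_, ?_, ?_, ?_⟩
  · obtain ⟨k, hk, rfl⟩ := hvk2 mx (PySem.List.max?_mem hmx)
    rw [← heq k]
    exact hkv1 k (hmem21 k hk)
  · obtain ⟨k, hk, rfl⟩ := hvk2 mn (PySem.List.min?_mem hmn)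
    rw [← heq k]
    exact hkv1 k (hmem21 k hk)
  · intro v hv
    obtain ⟨k, hk, rfl⟩ := hvk1 v hv
    have := PySem.List.max?_isMax hmx _ (hkv2 k (hmem12 k hk))
    rw [← heq k] at this
    exact this
  · intro v hv
    obtain ⟨k, hk, rfl⟩ := hvk1 v hv
    have := PySem.List.min?_isMin hmn _ (hkv2 k (hmem12 k hk))
    rw [← heq k] at this
    exact this


/-- the invariant holds for A's initial counters. -/
lemma pv_initA (R : PySem.Dict String String) (polymer : String) (k : Nat)
    (hne : polymer.toList ≠ [])
    (hsafe : ∀ p ∈ pvBase polymer, pvSafe R k p) :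
    pvInvA R polymer k (PySem.Dict.counter (pairs_from_str polymer))
      (PySem.Dict.counter (polymer.toList.map (fun c => String.ofList [c]))) := by
  have hP := PySem.Dict.nodup_keys_counter (pairs_from_str polymer)
  have hL := PySem.Dict.nodup_keys_counter (polymer.toList.map (fun c => String.ofList [c]))
  have hmemP : ∀ p, p ∈ (PySem.Dict.counter (pairs_from_str polymer)).keys
      ↔ p ∈ pairs_from_str polymer := by
    intro p
    rw [PySem.Dict.keys_counter]
    exact PySem.Set.mem_ofList _ p
  have hmemL : ∀ s, s ∈ (PySem.Dict.counter (polymer.toList.map (fun c => String.ofList [c]))).keys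
      ↔ s ∈ polymer.toList.map (fun c => String.ofList [c]) := by
    intro s
    rw [PySem.Dict.keys_counter]
    exact PySem.Set.mem_ofList _ s
  refine ⟨hP, hL, ?_, ?_, ?_, ?_, ?_⟩
  · intro p hp
    refine hsafe p ?_
    rw [← pv_pairs_eq]
    exact (hmemP p).1 hp
  · intro p
    rw [PySem.Dict.getD_counter]
    exact Int.natCast_nonneg _
  · intro p hp
    left
    rw [PySem.Dict.getD_counter]
    exact_mod_cast List.count_pos_iff.2 ((hmemP p).1 hp)
  · intro s hs
    rw [PySem.Dict.getD_counter]
    exact_mod_cast List.count_pos_iff.2 ((hmemL s).1 hs)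
  · rw [hmemL]
    rcases hcs : polymer.toList with _ | ⟨a, t⟩
    · exact absurd hcs hne
    · simp

-- ===== VERDICT (by name: the statement is the Claim_ definition above) =====
theorem solve_spec : Claim_equal_solve := by
  unfold Claim_equal_solve
  intro polymer rules n _ hpre
  unfold Spec_solve
  obtain ⟨hne, hcase⟩ := hpre
  have hbase : pairs_from_str polymer
      = (polymer.toList.zip (PySem.List.slice polymer.toList (some 1) none)).map
        (fun xy => String.ofList [xy.1, xy.2]) := rfl
  have hsteps : ((if 0 < n then n else 0) : Int).toNat = n.toNat := by
    split_ifs with h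
    · rfl
    · omega
  have HG : ∀ m, m < n.toNat →
      ∀ p ∈ pvU (PySem.Dict.ofList rules) polymer m,
        pvGoodB (PySem.Dict.ofList rules) p = true := by
    intro m hm
    rcases hcase with hn | hgoodf
    · omega
    · exact pv_HG (PySem.Dict.ofList rules) polymer rules n rfl (by omega) hgoodf m hm
  -- A's loop
  have hsafe : ∀ p ∈ pvBase polymer, pvSafe (PySem.Dict.ofList rules) n.toNat p := by
    intro p hp
    exact pv_safeBridge (PySem.Dict.ofList rules) polymer n.toNat HG n.toNat 0 (by omega) p
      ((PySem.Set.mem_ofList _ p).2 hp)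
  obtain ⟨P', L', hloopA, hL'nd, hL'pos, hL'head, hL'val⟩ :=
    pvA_loop (PySem.Dict.ofList rules) polymer n.toNat _ _
      (pv_initA (PySem.Dict.ofList rules) polymer n.toNat hne hsafe)
  -- B's BFS
  obtain ⟨mid', hbfs, hMnd, hMgood, hMval, hMpast⟩ :=
    pv_bfsLoop (PySem.Dict.ofList rules) polymer n.toNat HG n.toNat 0
      (pairs_from_str polymer) PySem.Dict.empty (by omega)
      (by simp [PySem.Dict.keys_empty])
      (by
        intro p hp
        exact (PySem.Set.mem_ofList _ p).2 (by rw [pv_pairs_eq] at hp; exact hp))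
      (by
        intro p hp
        right
        rw [pv_pairs_eq]
        exact (PySem.Set.mem_ofList _ p).1 hp)
      (by omega)
      (by simp [PySem.Dict.keys_empty])
      (by
        intro p v h
        rw [PySem.Dict.get?_empty] at h
        cases h)
      (by simp [PySem.Dict.keys_empty])
  -- B's DP
  obtain ⟨ins', hdp, hinv'⟩ :=
    pv_dpLoop (PySem.Dict.ofList rules) mid' hMnd hMval hMgood n.toNat 0
      (mid'.items.foldl (fun d pm => d.insert pm.1 (PySem.Dict.empty : SDict))
        PySem.Dict.empty)
      (pv_ins0 (PySem.Dict.ofList rules) mid' hMnd)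
  rw [show 0 + n.toNat = n.toNat by omega] at hinv'
  -- B's counts
  have hE : ∀ p, (ins'.getD p PySem.Dict.empty).keys.Nodup ∧
      ∀ s ∈ (ins'.getD p PySem.Dict.empty).keys,
        0 < (ins'.getD p PySem.Dict.empty).getD s 0 := by
    intro p
    obtain ⟨h1, h2, -, -⟩ :=
      pv_insinv_getD (PySem.Dict.ofList rules) mid' n.toNat ins' hinv' p
    exact ⟨h1, h2⟩
  have hC0nd : (polymer.toList.foldl
      (fun d ch => d.insert (String.ofList [ch]) (d.getD (String.ofList [ch]) 0 + 1))
      (PySem.Dict.empty : SDict)).keys.Nodup :=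
    pv_cfold_nodup polymer.toList PySem.Dict.empty (by simp [PySem.Dict.keys_empty])
  have hC0val : ∀ s, (polymer.toList.foldl
      (fun d ch => d.insert (String.ofList [ch]) (d.getD (String.ofList [ch]) 0 + 1))
      (PySem.Dict.empty : SDict)).getD s 0
      = (polymer.toList.map (fun ch => pvδ s (String.ofList [ch]))).sum := by
    intro s
    rw [pv_cfold_getD, PySem.Dict.getD_empty]
    ring
  have hC0pos : ∀ s ∈ (polymer.toList.foldl
      (fun d ch => d.insert (String.ofList [ch]) (d.getD (String.ofList [ch]) 0 + 1))
      (PySem.Dict.empty : SDict)).keys,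
      0 < (polymer.toList.foldl
        (fun d ch => d.insert (String.ofList [ch]) (d.getD (String.ofList [ch]) 0 + 1))
        (PySem.Dict.empty : SDict)).getD s 0 := by
    intro s hs
    rcases (pv_cfold_keys polymer.toList PySem.Dict.empty s).1 hs with ⟨ch, hch, rfl⟩ | h
    · rw [hC0val]
      have hterm : pvδ (String.ofList [ch]) (String.ofList [ch])
          ∈ polymer.toList.map (fun c => pvδ (String.ofList [ch]) (String.ofList [c])) :=
        List.mem_map.2 ⟨ch, hch, rfl⟩
      have hnn : ∀ x ∈ polymer.toList.map
          (fun c => pvδ (String.ofList [ch]) (String.ofList [c])), 0 ≤ x := by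
        intro x hx
        obtain ⟨c, _, rfl⟩ := List.mem_map.1 hx
        exact pvδ_nonneg _ _
      have := List.single_le_sum hnn _ hterm
      rw [pvδ_self] at this
      omega
    · rw [PySem.Dict.keys_empty] at h
      simp at h
  obtain ⟨hCnd, hCpos, hCval, hCsub⟩ :=
    pv_countsFold ins' hE (pairs_from_str polymer) _ hC0nd hC0pos
  -- per-pair values of the DP table
  have hInsVal : ∀ p ∈ pairs_from_str polymer, ∀ s,
      (ins'.getD p PySem.Dict.empty).getD s 0
        = pvIns (PySem.Dict.ofList rules) n.toNat p s := by
    intro p hp s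
    have hpU0 : p ∈ pvU (PySem.Dict.ofList rules) polymer 0 :=
      (PySem.Set.mem_ofList _ p).2 (by rw [pv_pairs_eq] at hp; exact hp)
    obtain ⟨-, -, hval3, hval4⟩ :=
      pv_insinv_getD (PySem.Dict.ofList rules) mid' n.toNat ins' hinv' p
    by_cases hmem : p ∈ mid'.keys
    · refine hval3 ?_ hmem s
      exact pv_covBridge (PySem.Dict.ofList rules) mid' polymer n.toNat
        (fun m hm => hMpast m hm) HG n.toNat 0 (by omega) p hpU0
    · rcases hN : n.toNat with _ | N'
      · rw [hval4 hmem s]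
        rfl
      · exact absurd (hMpast 0 (by omega) p hpU0) hmem
  -- the two final letter-count dictionaries agree
  have hEq : ∀ s, L'.getD s 0
      = ((pairs_from_str polymer).foldl
          (fun d p => dictAddInto d (ins'.getD p PySem.Dict.empty).items)
          (polymer.toList.foldl
            (fun d ch => d.insert (String.ofList [ch]) (d.getD (String.ofList [ch]) 0 + 1))
            (PySem.Dict.empty : SDict))).getD s 0 := by
    intro s
    rw [hCval s, hC0val s, hL'val s, pv_count_delta, pv_wsum_counter]
    have : ((pairs_from_str polymer).map
        (fun p => (ins'.getD p PySem.Dict.empty).getD s 0)).sum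
        = ((pairs_from_str polymer).map
          (fun p => pvIns (PySem.Dict.ofList rules) n.toNat p s)).sum := by
      refine congrArg List.sum (List.map_congr_left ?_)
      intro p hp
      exact hInsVal p hp s
    omega
  -- read off both answers
  have hkeysne : L'.keys ≠ [] := List.ne_nil_of_mem hL'head
  obtain ⟨most, least, hg0, hg1, hmostv, hleastv, hmostmax, hleastmin⟩ :=
    pv_A_final L' hkeysne
  obtain ⟨mx, mn, hmx, hmn, hmxv, hmnv, hmxmax, hmnmin⟩ :=
    pv_maxmin L' _ hL'nd hCnd hL'pos hCpos hEq hkeysne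
  have hmxeq : mx = most.2 := le_antisymm (hmostmax mx hmxv) (hmxmax most.2 hmostv)
  have hmneq : mn = least.2 := le_antisymm (hmnmin least.2 hleastv) (hleastmin mn hmnv)
  have hA : solve polymer rules n = most.2 - least.2 := by
    simp only [solve, hloopA, hg0, hg1]
  have hB : solve_alt polymer rules n = mx - mn := by
    simp only [solve_alt, hsteps]
    rw [← hbase, hbfs]
    simp only [hdp, hmx, hmn]
  rw [hA, hB, hmxeq, hmneq]
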